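-- pv_equiv track=rewrite | github.com/SRmohakal/LeetCode | 3742-maximum-path-score-in-a-grid/3742-maximum-path-score-in-a-grid.py | maxPathScore
-- ===== SOURCE A (Python) =====
-- from typing import List
--
-- def maxPathScore(grid: List[List[int]], k: int) -> int:
--     m,n = len(grid), len(grid[0])
--
--     dp = [[{} for _ in range(n)] for _ in range(m)]
--     dp[0][0] = {0:0}
--
--     for i in range(m):
--         for j in range(n):
--             if i == 0 and j == 0:
--                 continue
--
--             val = grid[i][j]
--             cost = 0 if val == 0 else 1
--             score = val
--             curr = {}
--
--             for pi, pj in [(i-1, j), (i, j-1)]: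
--                 if pi < 0 or pj < 0:
--                     continue
--
--                 for c_prev, s_prev in dp[pi][pj].items():
--                     new_cost = c_prev + cost
--                     if new_cost > k:
--                         continue
--
--                     new_score = s_prev + score
--
--                     if new_cost not in curr or curr[new_cost] < new_score:
--                         curr[new_cost] = new_score
--
--             items = sorted(curr.items())
--             pruned = {}
--             max_score_so_far = -1
--
--             for c, s in items:
--                 if s > max_score_so_far:
--                     pruned[c] = s
--                     max_score_so_far = s
--
--             dp[i][j] = pruned
--
--     if not dp[m-1][n-1]:
--         return -1
--
--     return max(dp[m-1][n-1].values())
-- ===== SOURCE B (Python) =====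
-- from typing import List
--
-- def maxPathScore(grid: List[List[int]], k: int) -> int:
--     # Layered "at most b nonzero cells" DP: sweep budgets b = 0..B (B = min(k, m+n-2));
--     # each layer is a plain best-path grid of one Optional scalar per cell, zero-valued
--     # cells read the current layer, nonzero cells spend 1 budget and read the previous
--     # layer.  A cell keeps its best score only while it is nonnegative (A prunes every
--     # state whose score is < 0, so such prefixes are dead ends).  The answer is the
--     # single entry of the last layer at the goal cell.
--     m, n = len(grid), len(grid[0])
--     B = min(k, m + n - 2)
--     if B < 0:
--         # the trivial single-cell path scores 0 and costs nothing; otherwise nothing is feasible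
--         return 0 if m == 1 and n == 1 else -1
--     layer = None
--     for b in range(B + 1):
--         prev, layer = layer, [[None] * n for _ in range(m)]
--         layer[0][0] = 0
--         for i in range(m):
--             for j in range(n):
--                 if i == 0 and j == 0:
--                     continue
--                 val = grid[i][j]
--                 src = layer if val == 0 else prev
--                 best = None
--                 if src is not None:
--                     if i > 0 and src[i - 1][j] is not None:
--                         best = src[i - 1][j]
--                     if j > 0 and src[i][j - 1] is not None and (best is None or src[i][j - 1] > best):
--                         best = src[i][j - 1]
--                 layer[i][j] = best + val if best is not None and best + val >= 0 else None
--     r = layer[m - 1][n - 1]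
--     return -1 if r is None else r
-- ===== Notes on version B (the rewrite author's own statement) =====
-- stated objective: alternative
-- what changed: Replaces A's per-cell collections of exact-cost (cost,score) states maintained as dicts with sorted-items dominance pruning by a budget-layered DP with a redefined state: for each budget b = 0..min(k,m+n-2) a whole grid layer holds one Optional scalar 'best score using at most b nonzero cells' per cell (zero cells read the current layer, nonzero cells the previous one, scores are dropped once negative exactly as A's prune threshold does), so there are no per-cell state sets, no sorting and no pruning pass, and the answer is read from one entry of the last layer.
import Mathlib
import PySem

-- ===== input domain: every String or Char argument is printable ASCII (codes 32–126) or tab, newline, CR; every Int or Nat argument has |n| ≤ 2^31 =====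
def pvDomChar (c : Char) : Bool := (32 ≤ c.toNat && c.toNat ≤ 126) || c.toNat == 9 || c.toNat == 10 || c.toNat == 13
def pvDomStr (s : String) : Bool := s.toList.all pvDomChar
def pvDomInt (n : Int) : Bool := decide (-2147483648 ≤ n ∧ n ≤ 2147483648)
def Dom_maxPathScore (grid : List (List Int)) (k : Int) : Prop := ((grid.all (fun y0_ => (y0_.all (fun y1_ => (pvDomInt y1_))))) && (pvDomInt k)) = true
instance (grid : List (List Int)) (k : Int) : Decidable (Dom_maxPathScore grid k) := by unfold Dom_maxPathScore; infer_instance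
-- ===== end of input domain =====

-- B replaces A's per-cell dicts of exact-cost states with sort-and-rebuild dominance pruning by a
-- budget-layered DP: one Optional "best score with at most b nonzero cells" scalar per cell per
-- budget layer, no state sets, no sorting, no pruning pass (objective: alternative).


-- ===== PORT A =====
-- shared 2-d list helpers (dp[i][j] read / write; indices in range wherever the Pythons read them)
def pvGet2 {α : Type} (dp : List (List α)) (i j : Nat) (d : α) : α := (dp.getD i []).getD j d
def pvSet2 {α : Type} (dp : List (List α)) (i j : Nat) (x : α) : List (List α) :=
  dp.set i ((dp.getD i []).set j x)

-- body of A's inner 'for c_prev, s_prev in dp[pi][pj].items()' loop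
def pvAUpd (k cost score : Int) (curr : PySem.Dict Int Int) (p : Int × Int) : PySem.Dict Int Int :=
  let nc := p.1 + cost
  if nc > k then curr
  else
    let ns := p.2 + score
    match curr.get? nc with
    | none => curr.insert nc ns
    | some v => if v < ns then curr.insert nc ns else curr

-- A's 'for c, s in items: if s > max_score_so_far: pruned[c] = s; ...' loop
def pvAPrune (items : List (Int × Int)) : PySem.Dict Int Int :=
  (items.foldl
    (fun (acc : PySem.Dict Int Int × Int) p =>
      if p.2 > acc.2 then (acc.1.insert p.1 p.2, p.2) else acc)
    (PySem.Dict.empty, -1)).1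

-- A's per-cell body (the '(i,j) ≠ (0,0)' branch)
def pvACell (grid : List (List Int)) (k : Int) (dp : List (List (PySem.Dict Int Int))) (i j : Nat) :
    PySem.Dict Int Int :=
  let val := (grid.getD i []).getD j 0      -- grid[i][j]; in range under Pre_
  let cost : Int := if val = 0 then 0 else 1
  let curr : PySem.Dict Int Int :=
    [((i : Int) - 1, (j : Int)), ((i : Int), (j : Int) - 1)].foldl
      (fun curr pq =>
        if pq.1 < 0 ∨ pq.2 < 0 then curr
        else ((pvGet2 dp pq.1.toNat pq.2.toNat PySem.Dict.empty).items).foldl (pvAUpd k cost val) curr)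
      PySem.Dict.empty
  pvAPrune (PySem.List.sorted2 curr.items Prod.fst Prod.snd false)

def maxPathScore (grid : List (List Int)) (k : Int) : Int :=
  let m := grid.length
  let n := grid.headI.length
  let dp0 := pvSet2 (List.replicate m (List.replicate n (PySem.Dict.empty : PySem.Dict Int Int)))
      0 0 (PySem.Dict.mk [(0, 0)])
  let dp := (List.range m).foldl
    (fun dp i =>
      (List.range n).foldl
        (fun dp j => if i = 0 ∧ j = 0 then dp else pvSet2 dp i j (pvACell grid k dp i j)) dp)
    dp0
  let last := pvGet2 dp (m - 1) (n - 1) PySem.Dict.empty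
  if last.items = [] then -1
  else (PySem.List.max? last.values (fun x => x)).getD 0

-- ===== PORT B =====
-- one cell of a budget layer: Python's body of the inner 'for j in range(n)' loop
def pvLCell (grid : List (List Int)) (prev : Option (List (List (Option Int))))
    (L : List (List (Option Int))) (i j : Nat) : Option Int :=
  let val := (grid.getD i []).getD j 0
  let src : Option (List (List (Option Int))) := if val = 0 then some L else prev
  let best : Option Int :=
    match src with
    | none => none
    | some S =>
      let best : Option Int := if 0 < i then pvGet2 S (i - 1) j none else none
      match (if 0 < j then pvGet2 S i (j - 1) none else none) with
      | none => best
      | some w =>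
        match best with
        | none => some w
        | some v => if w > v then some w else best
  match best with
  | none => none
  | some v => if v + val ≥ 0 then some (v + val) else none

-- one whole budget layer: Python's 'layer = [[None]*n ...]; layer[0][0] = 0; for i ...: for j ...'
def pvMkLayer (grid : List (List Int)) (m n : Nat) (prev : Option (List (List (Option Int)))) :
    List (List (Option Int)) :=
  (List.range m).foldl
    (fun L i =>
      (List.range n).foldl
        (fun L j => if i = 0 ∧ j = 0 then L else pvSet2 L i j (pvLCell grid prev L i j)) L)
    (pvSet2 (List.replicate m (List.replicate n (none : Option Int))) 0 0 (some 0))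

def maxPathScore_alt (grid : List (List Int)) (k : Int) : Int :=
  let m := grid.length
  let n := grid.headI.length
  let B : Int := min k ((m : Int) + (n : Int) - 2)
  if B < 0 then (if m = 1 ∧ n = 1 then 0 else -1)
  else
    let res : Option (List (List (Option Int))) :=
      (List.range (B.toNat + 1)).foldl (fun st _b => some (pvMkLayer grid m n st)) none
    match res with
    | none => -1
    | some L =>
      match pvGet2 L (m - 1) (n - 1) none with
      | none => -1
      | some r => r

-- ===== PRECONDITION & SPEC =====
-- Pre_ is exactly A's return domain: A raises IndexError on an empty grid, an empty first row,
-- or a row shorter than the first one (grid[i][j] with j < len(grid[0])).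
def Pre_maxPathScore (grid : List (List Int)) (k : Int) : Prop :=
  grid ≠ [] ∧ grid.headI ≠ [] ∧ ∀ row ∈ grid, grid.headI.length ≤ row.length
instance (grid : List (List Int)) (k : Int) : Decidable (Pre_maxPathScore grid k) := by
  unfold Pre_maxPathScore; infer_instance

def pvWitness_maxPathScore : List (List Int) × Int := ([[0, 3], [2, 0]], 1)

def Spec_maxPathScore (grid : List (List Int)) (k : Int) (out : Int) : Prop := out = maxPathScore_alt grid k
instance (grid : List (List Int)) (k : Int) (out : Int) : Decidable (Spec_maxPathScore grid k out) := by
  unfold Spec_maxPathScore; infer_instance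

-- ===== CLAIM (what is proved, stated in full; the proofs are below) =====
def Claim_equal_maxPathScore : Prop := ∀ (grid : List (List Int)) (k : Int), Dom_maxPathScore grid k → Pre_maxPathScore grid k → Spec_maxPathScore grid k (maxPathScore grid k)

-- ===== LEMMAS AND PROOFS =====

-- proof-side dense exact-cost model of A's dicts (cost-indexed arrays; only used by the proofs)
def pvBUpd (k val : Int) (cost : Nat) (pred : List (Option Int)) (cell : List (Option Int)) (c : Nat) :
    List (Option Int) :=
  match pred.getD c none with
  | none => cell
  | some s =>
    if (c : Int) + (cost : Int) > k then cell
    else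
      let ns := s + val
      let nc := c + cost
      match cell.getD nc none with
      | none => cell.set nc (some ns)
      | some v => if v < ns then cell.set nc (some ns) else cell

def pvBPrune (cell : List (Option Int)) : List (Option Int) :=
  (cell.foldl
    (fun (acc : List (Option Int) × Int) o =>
      match o with
      | some s => if s > acc.2 then (acc.1 ++ [some s], s) else (acc.1 ++ [none], acc.2)
      | none => (acc.1 ++ [none], acc.2))
    ([], -1)).1

def pvBCell (grid : List (List Int)) (k : Int) (K : Nat) (dp : List (List (List (Option Int)))) (i j : Nat) :
    List (Option Int) :=
  let val := (grid.getD i []).getD j 0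
  let cost : Nat := if val = 0 then 0 else 1
  let cell :=
    [((i : Int) - 1, (j : Int)), ((i : Int), (j : Int) - 1)].foldl
      (fun cell pq =>
        if pq.1 < 0 ∨ pq.2 < 0 then cell
        else (List.range (K + 1 - cost)).foldl
          (pvBUpd k val cost (pvGet2 dp pq.1.toNat pq.2.toNat [])) cell)
      (List.replicate (K + 1) (none : Option Int))
  pvBPrune cell

def pvBBest (cell : List (Option Int)) : Option Int :=
  cell.foldl
    (fun acc o =>
      match o with
      | none => acc
      | some s =>
        match acc with
        | none => some s
        | some b => if s > b then some s else acc)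
    none

-- the items, in cost order, of a dense cost-indexed cell whose first slot is absolute cost c0
def pvItemsFrom : Nat → List (Option Int) → List (Int × Int)
  | _, [] => []
  | c0, none :: rest => pvItemsFrom (c0 + 1) rest
  | c0, some s :: rest => ((c0 : Int), s) :: pvItemsFrom (c0 + 1) rest

-- structural form of the prune scan
def pvBPruneGo : Int → List (Option Int) → List (Option Int)
  | _, [] => []
  | run, none :: r => none :: pvBPruneGo run r
  | run, some s :: r => if s > run then some s :: pvBPruneGo s r else none :: pvBPruneGo run r

-- relation between A's per-cell dict and a dense cell (b bounds the cost of stored states)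
def pvCellInv (K b : Nat) (d : PySem.Dict Int Int) (cell : List (Option Int)) : Prop :=
  d.items = pvItemsFrom 0 cell ∧ cell.length = K + 1 ∧
    ∀ c : Nat, (cell.getD c none).isSome → c ≤ b

-- mid-construction relation between A's curr dict and the dense candidate array
def pvMapRel (K b : Nat) (curr : PySem.Dict Int Int) (cell : List (Option Int)) : Prop :=
  cell.length = K + 1 ∧
  (∀ c : Nat, c ≤ K → curr.get? (c : Int) = cell.getD c none) ∧
  (∀ p ∈ curr.items, ∃ c : Nat, p.1 = (c : Int) ∧ c ≤ K) ∧
  curr.keys.Nodup ∧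
  (∀ c : Nat, (cell.getD c none).isSome → c ≤ b)

-- relation between A's dict table and the dense table
def pvTabInv (m n K : Nat) (A2 : List (List (PySem.Dict Int Int))) (B2 : List (List (List (Option Int)))) : Prop :=
  A2.length = m ∧ B2.length = m ∧
  (∀ i, i < m → (A2.getD i []).length = n ∧ (B2.getD i []).length = n) ∧
  (∀ i j, i < m → j < n → pvCellInv K (i + j) (pvGet2 A2 i j PySem.Dict.empty) (pvGet2 B2 i j []))

theorem pv_itemsFrom_replicate (t c0 : Nat) : pvItemsFrom c0 (List.replicate t none) = [] := by
  induction t generalizing c0 with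
  | zero => rfl
  | succ t ih => simpa [List.replicate, pvItemsFrom] using ih (c0 + 1)

theorem pv_mem_itemsFrom_iff (cell : List (Option Int)) (c0 : Nat) (p : Int × Int) :
    p ∈ pvItemsFrom c0 cell ↔ ∃ t : Nat, p.1 = ((c0 + t : Nat) : Int) ∧ cell.getD t none = some p.2 := by
  induction cell generalizing c0 with
  | nil => simp [pvItemsFrom]
  | cons o rest ih =>
    cases o with
    | none =>
      rw [pvItemsFrom, ih]
      constructor
      · rintro ⟨t, h1, h2⟩
        exact ⟨t + 1, by rw [h1]; congr 1; omega, by simpa using h2⟩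
      · rintro ⟨t, h1, h2⟩
        cases t with
        | zero => simp at h2
        | succ t => exact ⟨t, by rw [h1]; congr 1; omega, by simpa using h2⟩
    | some s =>
      rw [pvItemsFrom, List.mem_cons, ih]
      constructor
      · rintro (h | ⟨t, h1, h2⟩)
        · exact ⟨0, by simp [h], by simp [h]⟩
        · exact ⟨t + 1, by rw [h1]; congr 1; omega, by simpa using h2⟩
      · rintro ⟨t, h1, h2⟩
        cases t with
        | zero =>
          left
          simp only [List.getD_cons_zero, Option.some.injEq] at h2
          obtain ⟨p1, p2⟩ := p
          simp only [Nat.add_zero] at h1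
          simp_all
        | succ t => exact Or.inr ⟨t, by rw [h1]; congr 1; omega, by simpa using h2⟩

theorem pv_pairwise_itemsFrom (cell : List (Option Int)) (c0 : Nat) :
    (pvItemsFrom c0 cell).Pairwise (fun a b => a.1 < b.1) := by
  induction cell generalizing c0 with
  | nil => simp [pvItemsFrom]
  | cons o rest ih =>
    cases o with
    | none => exact ih (c0 + 1)
    | some s =>
      rw [pvItemsFrom]
      refine List.Pairwise.cons ?_ (ih (c0 + 1))
      intro p hp
      obtain ⟨t, h1, _⟩ := (pv_mem_itemsFrom_iff rest (c0 + 1) p).1 hp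
      simp only [h1]
      exact_mod_cast by omega

theorem pv_snd_itemsFrom (cell : List (Option Int)) (c0 : Nat) :
    (pvItemsFrom c0 cell).map Prod.snd = cell.filterMap id := by
  induction cell generalizing c0 with
  | nil => rfl
  | cons o rest ih =>
    cases o with
    | none => simpa [pvItemsFrom] using ih (c0 + 1)
    | some s => simpa [pvItemsFrom] using ih (c0 + 1)

theorem pv_itemsFrom_eq_nil_iff (cell : List (Option Int)) (c0 : Nat) :
    pvItemsFrom c0 cell = [] ↔ cell.filterMap id = [] := by
  rw [← pv_snd_itemsFrom cell c0, List.map_eq_nil_iff]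

-- sorted(list of pairs) with pairwise-distinct first components sorts by the first component
theorem pv_insertBy_congr {α : Type} (f g : α → α → Bool) (x : α) (ys : List α)
    (h : ∀ b ∈ ys, f x b = g x b) : PySem.List.insertBy f x ys = PySem.List.insertBy g x ys := by
  induction ys with
  | nil => rfl
  | cons y t ih =>
    simp only [PySem.List.insertBy]
    rw [h y (List.mem_cons_self)]
    split
    · rfl
    · rw [ih (fun b hb => h b (List.mem_cons_of_mem _ hb))]

theorem pv_sorted2_eq_sorted_aux (xs : List (Int × Int)) :
    ∀ acc : List (Int × Int), (∀ p ∈ xs, ∀ q ∈ acc, p.1 ≠ q.1) → (xs.map Prod.fst).Nodup →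
    xs.foldl (fun acc x => PySem.List.insertBy
      (fun a b => decide (a.1 < b.1) || (!decide (b.1 < a.1) && decide (a.2 < b.2))) x acc) acc
    = xs.foldl (fun acc x => PySem.List.insertBy (fun a b => decide (a.1 < b.1)) x acc) acc := by
  induction xs with
  | nil => intro acc _ _; rfl
  | cons x t ih =>
    intro acc hacc hnd
    simp only [List.foldl_cons]
    have hcong : PySem.List.insertBy
        (fun a b => decide (a.1 < b.1) || (!decide (b.1 < a.1) && decide (a.2 < b.2))) x acc
        = PySem.List.insertBy (fun a b => decide (a.1 < b.1)) x acc := by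
      apply pv_insertBy_congr
      intro b hb
      have hne : x.1 ≠ b.1 := hacc x (List.mem_cons_self) b hb
      rcases lt_trichotomy x.1 b.1 with h | h | h
      · simp [h, asymm h]
      · exact absurd h hne
      · simp [h, asymm h]
    rw [hcong]
    apply ih
    · intro p hp q hq
      rw [PySem.List.mem_insertBy] at hq
      rcases hq with rfl | hq
      · intro heq
        simp only [List.map_cons, List.nodup_cons] at hnd
        exact hnd.1 (heq ▸ List.mem_map_of_mem hp)
      · exact hacc p (List.mem_cons_of_mem _ hp) q hq
    · simp only [List.map_cons, List.nodup_cons] at hnd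
      exact hnd.2

theorem pv_sorted2_eq (xs ys : List (Int × Int)) (hperm : ys.Perm xs)
    (hpw : ys.Pairwise (fun a b => a.1 < b.1)) :
    PySem.List.sorted2 xs Prod.fst Prod.snd false = ys := by
  have hysnd : (ys.map Prod.fst).Nodup :=
    List.pairwise_map.mpr (hpw.imp fun h => ne_of_lt h)
  have hxsnd : (xs.map Prod.fst).Nodup := ((hperm.map Prod.fst).nodup_iff).mp hysnd
  have h2 : PySem.List.sorted2 xs Prod.fst Prod.snd false = PySem.List.sorted xs Prod.fst false := by
    calc PySem.List.sorted2 xs Prod.fst Prod.snd false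
        = xs.foldl (fun acc x => PySem.List.insertBy
            (fun a b => decide (a.1 < b.1) || (!decide (b.1 < a.1) && decide (a.2 < b.2))) x acc) [] := rfl
      _ = xs.foldl (fun acc x => PySem.List.insertBy (fun a b => decide (a.1 < b.1)) x acc) [] :=
          pv_sorted2_eq_sorted_aux xs [] (by simp) hxsnd
      _ = PySem.List.sorted xs Prod.fst false := rfl
  rw [h2]
  exact PySem.List.sorted_eq_of_perm_of_pairwise_lt xs ys Prod.fst hperm hpw

theorem pv_rel_init (K b : Nat) : pvMapRel K b PySem.Dict.empty (List.replicate (K + 1) none) := by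
  refine ⟨List.length_replicate, ?_, ?_, ?_, ?_⟩
  · intro c _
    rw [PySem.Dict.get?_empty, List.getD_eq_getElem?_getD, List.getElem?_replicate]
    split <;> rfl
  · intro p hp; simp [PySem.Dict.empty] at hp
  · exact PySem.Dict.nodup_keys_empty
  · intro c h
    rw [List.getD_eq_getElem?_getD, List.getElem?_replicate] at h
    split at h <;> simp at h

theorem pv_rel_upd (K b : Nat) (curr : PySem.Dict Int Int) (cell : List (Option Int))
    (hRel : pvMapRel K b curr cell) (nc : Nat) (hncK : nc ≤ K) (hncb : nc ≤ b) (ns : Int) :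
    pvMapRel K b (curr.insert (nc : Int) ns) (cell.set nc (some ns)) := by
  obtain ⟨hlen, hget, hkeys, hnd, hbnd⟩ := hRel
  refine ⟨by rw [List.length_set, hlen], ?_, ?_, ?_, ?_⟩
  · intro c hc
    rw [PySem.Dict.get?_insert, List.getD_eq_getElem?_getD, List.getElem?_set]
    by_cases hceq : c = nc
    · subst hceq
      rw [if_pos rfl, if_pos rfl, if_pos (by omega)]
      rfl
    · rw [if_neg (by exact_mod_cast hceq), if_neg (fun h => hceq h.symm), hget c hc,
        List.getD_eq_getElem?_getD]
  · intro p hp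
    rw [PySem.Dict.mem_items_insert] at hp
    rcases hp with rfl | ⟨hp, _⟩
    · exact ⟨nc, rfl, hncK⟩
    · exact hkeys p hp
  · exact PySem.Dict.nodup_keys_insert _ _ _ hnd
  · intro c h
    rw [List.getD_eq_getElem?_getD, List.getElem?_set] at h
    by_cases hceq : nc = c
    · omega
    · rw [if_neg hceq] at h
      exact hbnd c (by rwa [List.getD_eq_getElem?_getD])

theorem pv_cand_tail (k val : Int) (cost : Nat) (M : Int) (K : Nat)
    (hK : (K : Int) = max (min k M) 0) (hcost : cost ≤ 1)
    (predCell : List (Option Int)) (bp : Nat) (hbpM : (bp : Int) + 1 ≤ M)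
    (hpred : ∀ c : Nat, (predCell.getD c none).isSome → c ≤ bp) :
    ∀ (suffix : List (Option Int)) (c0 : Nat), predCell.drop c0 = suffix → K + 1 ≤ c0 + cost →
    ∀ curr, List.foldl (pvAUpd k (cost : Int) val) curr (pvItemsFrom c0 suffix) = curr := by
  intro suffix
  induction suffix with
  | nil => intro c0 _ _ curr; rfl
  | cons o rest ih =>
    intro c0 hdrop hover curr
    have hdrop' : predCell.drop (c0 + 1) = rest := by
      rw [← List.tail_drop, hdrop, List.tail_cons]
    cases o with
    | none => exact ih (c0 + 1) hdrop' (by omega) curr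
    | some s =>
      have hget : predCell.getD c0 none = some s := by
        have h0 : predCell[c0]? = some (some s) := by
          have := congrArg (fun l => l[0]?) hdrop
          simpa [List.getElem?_drop] using this
        rw [List.getD_eq_getElem?_getD, h0]
        rfl
      have hc0bp : c0 ≤ bp := hpred c0 (by rw [hget]; rfl)
      have hguard : (c0 : Int) + (cost : Int) > k := by
        by_contra hle
        rw [not_lt] at hle
        have hM : (c0 : Int) + (cost : Int) ≤ M := by
          have : (c0 : Int) ≤ (bp : Int) := by exact_mod_cast hc0bp
          have : (cost : Int) ≤ 1 := by exact_mod_cast hcost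
          omega
        have : ((c0 + cost : Nat) : Int) ≤ (K : Int) := by
          rw [hK]
          push_cast
          omega
        have : c0 + cost ≤ K := by exact_mod_cast this
        omega
      rw [pvItemsFrom, List.foldl_cons]
      rw [show pvAUpd k (cost : Int) val curr ((c0 : Int), s) = curr from by
        simp only [pvAUpd]
        rw [if_pos hguard]]
      exact ih (c0 + 1) hdrop' (by omega) curr

theorem pv_cand_aux (k val : Int) (cost : Nat) (M : Int) (K : Nat) (hcost : cost ≤ 1)
    (hK : (K : Int) = max (min k M) 0)
    (predCell : List (Option Int)) (hplen : predCell.length = K + 1)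
    (bp : Nat) (hbpM : (bp : Int) + 1 ≤ M)
    (hpred : ∀ c : Nat, (predCell.getD c none).isSome → c ≤ bp)
    (b : Nat) (hb : bp + cost ≤ b) :
    ∀ (suffix : List (Option Int)) (c0 : Nat), predCell.drop c0 = suffix →
    ∀ curr cell, pvMapRel K b curr cell →
    pvMapRel K b (List.foldl (pvAUpd k (cost : Int) val) curr (pvItemsFrom c0 suffix))
      ((List.range' c0 (K + 1 - cost - c0)).foldl (pvBUpd k val cost predCell) cell) := by
  intro suffix
  induction suffix with
  | nil =>
    intro c0 hdrop curr cell hRel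
    rw [show K + 1 - cost - c0 = 0 by
      have h := List.drop_eq_nil_iff.mp hdrop
      omega]
    exact hRel
  | cons o rest ih =>
    intro c0 hdrop curr cell hRel
    have hdrop' : predCell.drop (c0 + 1) = rest := by
      rw [← List.tail_drop, hdrop, List.tail_cons]
    have hget : predCell.getD c0 none = o := by
      have h0 : predCell[c0]? = some o := by
        have := congrArg (fun l => l[0]?) hdrop
        simpa [List.getElem?_drop] using this
      rw [List.getD_eq_getElem?_getD, h0]
      rfl
    by_cases hc : c0 < K + 1 - cost
    · have hrange : List.range' c0 (K + 1 - cost - c0)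
          = c0 :: List.range' (c0 + 1) (K + 1 - cost - (c0 + 1)) := by
        rw [show K + 1 - cost - c0 = (K + 1 - cost - (c0 + 1)) + 1 by omega, List.range'_succ]
      rw [hrange, List.foldl_cons]
      cases o with
      | none =>
        rw [pvItemsFrom, show pvBUpd k val cost predCell cell c0 = cell from by
          simp only [pvBUpd, hget]]
        exact ih (c0 + 1) hdrop' curr cell hRel
      | some s =>
        rw [pvItemsFrom, List.foldl_cons]
        have hc0bp : c0 ≤ bp := hpred c0 (by rw [hget]; rfl)
        by_cases hg : (c0 : Int) + (cost : Int) > k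
        · rw [show pvAUpd k (cost : Int) val curr ((c0 : Int), s) = curr from by
            simp only [pvAUpd]; rw [if_pos hg]]
          rw [show pvBUpd k val cost predCell cell c0 = cell from by
            simp only [pvBUpd, hget]; rw [if_pos hg]]
          exact ih (c0 + 1) hdrop' curr cell hRel
        · have hncK : c0 + cost ≤ K := by
            have h1 : (c0 : Int) + (cost : Int) ≤ k := by omega
            have h2 : (c0 : Int) + (cost : Int) ≤ M := by
              have hb' : (c0 : Int) ≤ (bp : Int) := by exact_mod_cast hc0bp
              have hc' : (cost : Int) ≤ 1 := by exact_mod_cast hcost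
              omega
            have : ((c0 + cost : Nat) : Int) ≤ (K : Int) := by rw [hK]; push_cast; omega
            exact_mod_cast this
          have hgets : curr.get? ((c0 : Int) + (cost : Int)) = cell.getD (c0 + cost) none := by
            have := hRel.2.1 (c0 + cost) hncK
            rwa [Nat.cast_add] at this
          have hcast : ((c0 : Int) + (cost : Int)) = (((c0 + cost : Nat)) : Int) := by push_cast; ring
          have hub : c0 + cost ≤ b := by omega
          cases hcell : cell.getD (c0 + cost) none with
          | none =>
            have hstepA : pvAUpd k (cost : Int) val curr ((c0 : Int), s)
                = curr.insert ((c0 : Int) + (cost : Int)) (s + val) := by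
              simp only [pvAUpd]
              rw [if_neg hg, hgets, hcell]
            have hstepB : pvBUpd k val cost predCell cell c0
                = cell.set (c0 + cost) (some (s + val)) := by
              simp only [pvBUpd, hget]
              rw [if_neg hg, hcell]
            rw [hstepA, hstepB]
            refine ih (c0 + 1) hdrop' _ _ ?_
            rw [hcast]
            exact pv_rel_upd K b curr cell hRel (c0 + cost) hncK hub (s + val)
          | some v =>
            have hstepA : pvAUpd k (cost : Int) val curr ((c0 : Int), s)
                = if v < s + val then curr.insert ((c0 : Int) + (cost : Int)) (s + val) else curr := by
              simp only [pvAUpd]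
              rw [if_neg hg, hgets, hcell]
            have hstepB : pvBUpd k val cost predCell cell c0
                = if v < s + val then cell.set (c0 + cost) (some (s + val)) else cell := by
              simp only [pvBUpd, hget]
              rw [if_neg hg, hcell]
            rw [hstepA, hstepB]
            by_cases hv : v < s + val
            · rw [if_pos hv, if_pos hv]
              refine ih (c0 + 1) hdrop' _ _ ?_
              rw [hcast]
              exact pv_rel_upd K b curr cell hRel (c0 + cost) hncK hub (s + val)
            · rw [if_neg hv, if_neg hv]
              exact ih (c0 + 1) hdrop' curr cell hRel
    · rw [show K + 1 - cost - c0 = 0 by omega]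
      rw [pv_cand_tail k val cost M K hK hcost predCell bp hbpM hpred (o :: rest) c0 hdrop
        (by omega) curr]
      exact hRel

theorem pv_bprune_aux (cell : List (Option Int)) :
    ∀ (acc : List (Option Int)) (run : Int),
    (cell.foldl
      (fun (acc : List (Option Int) × Int) o =>
        match o with
        | some s => if s > acc.2 then (acc.1 ++ [some s], s) else (acc.1 ++ [none], acc.2)
        | none => (acc.1 ++ [none], acc.2))
      (acc, run)).1 = acc ++ pvBPruneGo run cell := by
  induction cell with
  | nil => intro acc run; simp [pvBPruneGo]
  | cons o r ih =>
    intro acc run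
    cases o with
    | none => simp [pvBPruneGo, ih]
    | some s =>
      by_cases h : s > run
      · simp [pvBPruneGo, h, ih]
      · simp [pvBPruneGo, h, ih]

theorem pv_bprune_eq_go (cell : List (Option Int)) : pvBPrune cell = pvBPruneGo (-1) cell := by
  rw [pvBPrune]
  simpa using pv_bprune_aux cell [] (-1)

theorem pv_go_length (run : Int) (cell : List (Option Int)) :
    (pvBPruneGo run cell).length = cell.length := by
  induction cell generalizing run with
  | nil => rfl
  | cons o r ih =>
    cases o with
    | none => simp [pvBPruneGo, ih]
    | some s =>
      rw [pvBPruneGo]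
      split <;> simp [ih]

theorem pv_go_entry (run : Int) (cell : List (Option Int)) (c : Nat)
    (h : ((pvBPruneGo run cell).getD c none).isSome) : (cell.getD c none).isSome := by
  induction cell generalizing run c with
  | nil => simp [pvBPruneGo] at h
  | cons o r ih =>
    cases o with
    | none =>
      rw [pvBPruneGo] at h
      cases c with
      | zero => simp at h
      | succ c => exact ih run c (by simpa using h)
    | some s =>
      cases c with
      | zero => simp
      | succ c =>
        rw [pvBPruneGo] at h
        split at h
        · exact ih s c (by simpa using h)
        · exact ih run c (by simpa using h)

theorem pv_aprune_go (cell : List (Option Int)) : ∀ (c0 : Nat) (d : PySem.Dict Int Int) (run : Int),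
    (∀ p ∈ d.items, p.1 < (c0 : Int)) →
    ((pvItemsFrom c0 cell).foldl
      (fun (acc : PySem.Dict Int Int × Int) p =>
        if p.2 > acc.2 then (acc.1.insert p.1 p.2, p.2) else acc) (d, run)).1.items
      = d.items ++ pvItemsFrom c0 (pvBPruneGo run cell) := by
  induction cell with
  | nil => intro c0 d run _; simp [pvItemsFrom, pvBPruneGo]
  | cons o r ih =>
    intro c0 d run hd
    cases o with
    | none =>
      rw [pvItemsFrom, pvBPruneGo, pvItemsFrom]
      exact ih (c0 + 1) d run (fun p hp => lt_trans (hd p hp) (by exact_mod_cast by omega))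
    | some s =>
      rw [pvItemsFrom, pvBPruneGo]
      by_cases h : s > run
      · have hnc : d.contains ((c0 : Nat) : Int) = false := by
          rw [← Bool.not_eq_true, PySem.Dict.contains_iff_mem_keys]
          intro hmem
          obtain ⟨p, hp, hp1⟩ := List.mem_map.mp hmem
          exact absurd (hp1 ▸ hd p hp) (lt_irrefl _)
        have hins := PySem.Dict.items_insert_of_not_contains d (k := ((c0 : Nat) : Int)) s hnc
        simp only [List.foldl_cons, if_pos h]
        rw [ih (c0 + 1) (d.insert (c0 : Int) s) s
          (by
            intro p hp
            rw [hins, List.mem_append] at hp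
            rcases hp with hp | hp
            · exact lt_trans (hd p hp) (by exact_mod_cast by omega)
            · simp only [List.mem_singleton] at hp
              rw [hp]
              exact_mod_cast by omega)]
        rw [hins, pvItemsFrom]
        simp
      · simp only [List.foldl_cons, if_neg h]
        rw [ih (c0 + 1) d run (fun p hp => lt_trans (hd p hp) (by exact_mod_cast by omega))]
        rw [pvItemsFrom]

theorem pv_getD_replicate {α : Type} (t : Nat) (a d : α) (c : Nat) :
    (List.replicate t a).getD c d = if c < t then a else d := by
  rw [List.getD_eq_getElem?_getD, List.getElem?_replicate]
  split <;> rfl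

theorem pv_get2_replicate {α : Type} (m n : Nat) (r d : α) (i j : Nat) (hi : i < m) (hj : j < n) :
    pvGet2 (List.replicate m (List.replicate n r)) i j d = r := by
  rw [pvGet2, pv_getD_replicate, if_pos hi, pv_getD_replicate, if_pos hj]

theorem pv_getD_set {α : Type} (l : List α) (i j : Nat) (x : α) (d : α) :
    (l.set i x).getD j d = if i = j ∧ i < l.length then x else l.getD j d := by
  rw [List.getD_eq_getElem?_getD, List.getElem?_set]
  by_cases h : i = j
  · subst h
    by_cases hl : i < l.length
    · simp [hl]
    · simp [hl, List.getD_eq_getElem?_getD]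
  · simp [h, List.getD_eq_getElem?_getD]

theorem pv_get2_set2_self {α : Type} (dp : List (List α)) (i j : Nat) (x d : α)
    (hi : i < dp.length) (hj : j < (dp.getD i []).length) :
    pvGet2 (pvSet2 dp i j x) i j d = x := by
  rw [pvGet2, pvSet2, pv_getD_set, if_pos ⟨rfl, hi⟩, pv_getD_set, if_pos ⟨rfl, hj⟩]

theorem pv_get2_set2_ne {α : Type} (dp : List (List α)) (i j : Nat) (x d : α) (i' j' : Nat)
    (h : ¬(i' = i ∧ j' = j)) : pvGet2 (pvSet2 dp i j x) i' j' d = pvGet2 dp i' j' d := by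
  rw [pvGet2, pvSet2, pv_getD_set, pvGet2]
  by_cases hii : i = i' ∧ i < dp.length
  · rw [if_pos hii, hii.1, pv_getD_set, if_neg (by intro hc; exact h ⟨hii.1.symm, hc.1.symm⟩)]
  · rw [if_neg hii]

theorem pv_row_len_set2 {α : Type} (dp : List (List α)) (i j : Nat) (x : α) (i' : Nat) :
    ((pvSet2 dp i j x).getD i' []).length = (dp.getD i' []).length := by
  rw [pvSet2, pv_getD_set]
  by_cases hii : i = i' ∧ i < dp.length
  · rw [if_pos hii, List.length_set, hii.1]
  · rw [if_neg hii]

theorem pv_rel_perm (K b : Nat) (curr : PySem.Dict Int Int) (cand : List (Option Int))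
    (hRel : pvMapRel K b curr cand) : (pvItemsFrom 0 cand).Perm curr.items := by
  obtain ⟨hlen, hget, hkeys, hnd, _⟩ := hRel
  apply List.perm_of_nodup_nodup_toFinset_eq
  · exact (pv_pairwise_itemsFrom cand 0).imp
      (fun h => by intro he; rw [he] at h; exact lt_irrefl _ h)
  · exact List.Nodup.of_map Prod.fst hnd
  · ext p
    simp only [List.mem_toFinset]
    constructor
    · intro hp
      obtain ⟨t, hp1, hp2⟩ := (pv_mem_itemsFrom_iff cand 0 p).1 hp
      have ht : t < cand.length := by
        by_contra hcon
        rw [List.getD_eq_getElem?_getD, List.getElem?_eq_none (by omega)] at hp2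
        simp at hp2
      have htK : t ≤ K := by omega
      have : curr.get? p.1 = some p.2 := by
        rw [hp1, show ((0 + t : Nat) : Int) = ((t : Nat) : Int) by push_cast; ring, hget t htK, hp2]
      obtain ⟨p1, p2⟩ := p
      exact PySem.Dict.mem_items_of_get?_eq_some curr this
    · intro hp
      obtain ⟨c, hc1, hc2⟩ := hkeys p hp
      have hg : curr.get? p.1 = some p.2 := by
        obtain ⟨p1, p2⟩ := p
        exact PySem.Dict.get?_of_mem_items curr hp hnd
      rw [hc1, hget c hc2] at hg
      exact (pv_mem_itemsFrom_iff cand 0 p).2 ⟨c, by rw [hc1]; congr 1; omega, hg⟩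

theorem pv_cell_finish (K b : Nat) (curr : PySem.Dict Int Int) (cand : List (Option Int))
    (hRel : pvMapRel K b curr cand) :
    pvCellInv K b (pvAPrune (PySem.List.sorted2 curr.items Prod.fst Prod.snd false)) (pvBPrune cand) := by
  have hglue : PySem.List.sorted2 curr.items Prod.fst Prod.snd false = pvItemsFrom 0 cand :=
    pv_sorted2_eq curr.items (pvItemsFrom 0 cand) (pv_rel_perm K b curr cand hRel)
      (pv_pairwise_itemsFrom cand 0)
  rw [hglue, pv_bprune_eq_go]
  refine ⟨?_, ?_, ?_⟩
  · rw [pvAPrune, pv_aprune_go cand 0 PySem.Dict.empty (-1)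
      (by intro p hp; simp [PySem.Dict.empty] at hp)]
    simp [PySem.Dict.empty]
  · rw [pv_go_length]
    exact hRel.1
  · intro c hc
    exact hRel.2.2.2.2 c (pv_go_entry _ _ _ hc)

theorem pv_cell_step (grid : List (List Int)) (k : Int) (m n K : Nat)
    (hK : (K : Int) = max (min k ((m : Int) + (n : Int))) 0)
    (A2 : List (List (PySem.Dict Int Int))) (B2 : List (List (List (Option Int))))
    (hTab : pvTabInv m n K A2 B2) (i j : Nat) (hi : i < m) (hj : j < n) (hij : ¬(i = 0 ∧ j = 0)) :
    pvCellInv K (i + j) (pvACell grid k A2 i j) (pvBCell grid k K B2 i j) := by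
  obtain ⟨hAl, hBl, hrows, hcells⟩ := hTab
  simp only [pvACell, pvBCell, List.foldl_cons, List.foldl_nil]
  set V := (grid.getD i []).getD j 0 with hV
  have hcast : (if V = 0 then (0 : Int) else 1) = ((if V = 0 then (0 : Nat) else 1 : Nat) : Int) := by
    split <;> rfl
  rw [hcast]
  set cN : Nat := (if V = 0 then 0 else 1) with hcN
  have hcN1 : cN ≤ 1 := by rw [hcN]; split <;> omega
  have hrangeEq : List.range (K + 1 - cN) = List.range' 0 (K + 1 - cN - 0) := by
    rw [List.range_eq_range', Nat.sub_zero]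
  rcases Nat.eq_zero_or_pos i with hi0 | hipos
  · subst hi0
    have hj0 : 0 < j := by omega
    have hg1 : (((0 : Nat) : Int) - 1 < 0 ∨ ((j : Nat) : Int) < 0) := by left; omega
    have hg2 : ¬(((0 : Nat) : Int) < 0 ∨ ((j : Nat) : Int) - 1 < 0) := by
      rintro (h | h) <;> omega
    rw [if_pos hg1, if_pos hg1, if_neg hg2, if_neg hg2]
    have e1 : (((j : Nat) : Int) - 1).toNat = j - 1 := by omega
    have e0 : (((0 : Nat) : Int)).toNat = 0 := by omega
    rw [e1, e0]
    obtain ⟨hpitems, hplen, hpbnd⟩ := hcells 0 (j - 1) (by omega) (by omega)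
    rw [hpitems, hrangeEq]
    exact pv_cell_finish K (0 + j) _ _
      (pv_cand_aux k V cN ((m : Int) + (n : Int)) K hcN1 hK
        (pvGet2 B2 0 (j - 1) []) hplen (0 + (j - 1))
        (by have h1 : j - 1 ≤ n - 1 := by omega
            have h2 : (1 : Nat) ≤ m := by omega
            push_cast
            omega)
        hpbnd (0 + j) (by omega)
        (pvGet2 B2 0 (j - 1) []) 0 List.drop_zero
        PySem.Dict.empty (List.replicate (K + 1) none) (pv_rel_init K (0 + j)))
  · rcases Nat.eq_zero_or_pos j with hj0 | hjpos
    · subst hj0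
      have hg1 : ¬(((i : Nat) : Int) - 1 < 0 ∨ ((0 : Nat) : Int) < 0) := by
        rintro (h | h) <;> omega
      have hg2 : (((i : Nat) : Int) < 0 ∨ ((0 : Nat) : Int) - 1 < 0) := by right; omega
      rw [if_neg hg1, if_neg hg1, if_pos hg2, if_pos hg2]
      have e1 : (((i : Nat) : Int) - 1).toNat = i - 1 := by omega
      have e0 : (((0 : Nat) : Int)).toNat = 0 := by omega
      rw [e1, e0]
      obtain ⟨hpitems, hplen, hpbnd⟩ := hcells (i - 1) 0 (by omega) (by omega)
      rw [hpitems, hrangeEq]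
      exact pv_cell_finish K (i + 0) _ _
        (pv_cand_aux k V cN ((m : Int) + (n : Int)) K hcN1 hK
          (pvGet2 B2 (i - 1) 0 []) hplen ((i - 1) + 0)
          (by have h1 : i - 1 ≤ m - 1 := by omega
              have h2 : (1 : Nat) ≤ n := by omega
              push_cast
              omega)
          hpbnd (i + 0) (by omega)
          (pvGet2 B2 (i - 1) 0 []) 0 List.drop_zero
          PySem.Dict.empty (List.replicate (K + 1) none) (pv_rel_init K (i + 0)))
    · have hg1 : ¬(((i : Nat) : Int) - 1 < 0 ∨ ((j : Nat) : Int) < 0) := by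
        rintro (h | h) <;> omega
      have hg2 : ¬(((i : Nat) : Int) < 0 ∨ ((j : Nat) : Int) - 1 < 0) := by
        rintro (h | h) <;> omega
      rw [if_neg hg1, if_neg hg1, if_neg hg2, if_neg hg2]
      have e1 : (((i : Nat) : Int) - 1).toNat = i - 1 := by omega
      have e2 : (((j : Nat) : Int) - 1).toNat = j - 1 := by omega
      have e3 : (((i : Nat) : Int)).toNat = i := by omega
      have e4 : (((j : Nat) : Int)).toNat = j := by omega
      rw [e1, e2, e3, e4]
      obtain ⟨hpitems1, hplen1, hpbnd1⟩ := hcells (i - 1) j (by omega) (by omega)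
      obtain ⟨hpitems2, hplen2, hpbnd2⟩ := hcells i (j - 1) (by omega) (by omega)
      rw [hpitems1, hpitems2, hrangeEq]
      exact pv_cell_finish K (i + j) _ _
        (pv_cand_aux k V cN ((m : Int) + (n : Int)) K hcN1 hK
          (pvGet2 B2 i (j - 1) []) hplen2 (i + (j - 1))
          (by have h1 : i ≤ m - 1 := by omega
              have h2 : j - 1 ≤ n - 1 := by omega
              push_cast
              omega)
          hpbnd2 (i + j) (by omega)
          (pvGet2 B2 i (j - 1) []) 0 List.drop_zero _ _
          (pv_cand_aux k V cN ((m : Int) + (n : Int)) K hcN1 hK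
            (pvGet2 B2 (i - 1) j []) hplen1 ((i - 1) + j)
            (by have h1 : i - 1 ≤ m - 1 := by omega
                have h2 : j ≤ n - 1 := by omega
                push_cast
                omega)
            hpbnd1 (i + j) (by omega)
            (pvGet2 B2 (i - 1) j []) 0 List.drop_zero
            PySem.Dict.empty (List.replicate (K + 1) none) (pv_rel_init K (i + j))))

theorem pv_tab_step (grid : List (List Int)) (k : Int) (m n K : Nat)
    (hK : (K : Int) = max (min k ((m : Int) + (n : Int))) 0)
    (A2 : List (List (PySem.Dict Int Int))) (B2 : List (List (List (Option Int))))
    (hTab : pvTabInv m n K A2 B2) (i j : Nat) (hi : i < m) (hj : j < n) (hij : ¬(i = 0 ∧ j = 0)) :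
    pvTabInv m n K (pvSet2 A2 i j (pvACell grid k A2 i j)) (pvSet2 B2 i j (pvBCell grid k K B2 i j)) := by
  obtain ⟨hA, hB, hrows, hcells⟩ := hTab
  refine ⟨by rw [pvSet2, List.length_set, hA], by rw [pvSet2, List.length_set, hB], ?_, ?_⟩
  · intro i' hi'
    rw [pv_row_len_set2, pv_row_len_set2]
    exact hrows i' hi'
  · intro i' j' hi' hj'
    by_cases hsame : i' = i ∧ j' = j
    · obtain ⟨rfl, rfl⟩ := hsame
      rw [pv_get2_set2_self _ _ _ _ _ (by omega) (by rw [(hrows i' hi').1]; omega),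
        pv_get2_set2_self _ _ _ _ _ (by omega) (by rw [(hrows i' hi').2]; omega)]
      exact pv_cell_step grid k m n K hK A2 B2 ⟨hA, hB, hrows, hcells⟩ i' j' hi' hj' hij
    · rw [pv_get2_set2_ne _ _ _ _ _ _ _ hsame, pv_get2_set2_ne _ _ _ _ _ _ _ hsame]
      exact hcells i' j' hi' hj'

theorem pv_fold (grid : List (List Int)) (k : Int) (m n K : Nat)
    (hK : (K : Int) = max (min k ((m : Int) + (n : Int))) 0) :
    ∀ (is : List Nat) (A2 : List (List (PySem.Dict Int Int))) (B2 : List (List (List (Option Int)))),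
    (∀ i ∈ is, i < m) → pvTabInv m n K A2 B2 →
    pvTabInv m n K
      (is.foldl (fun dp i => (List.range n).foldl
        (fun dp j => if i = 0 ∧ j = 0 then dp else pvSet2 dp i j (pvACell grid k dp i j)) dp) A2)
      (is.foldl (fun dp i => (List.range n).foldl
        (fun dp j => if i = 0 ∧ j = 0 then dp else pvSet2 dp i j (pvBCell grid k K dp i j)) dp) B2) := by
  have hcols : ∀ (i : Nat), i < m → ∀ (js : List Nat),
      (∀ j ∈ js, j < n) →
      ∀ (A2 : List (List (PySem.Dict Int Int))) (B2 : List (List (List (Option Int)))),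
      pvTabInv m n K A2 B2 →
      pvTabInv m n K
        (js.foldl (fun dp j => if i = 0 ∧ j = 0 then dp else pvSet2 dp i j (pvACell grid k dp i j)) A2)
        (js.foldl (fun dp j => if i = 0 ∧ j = 0 then dp else pvSet2 dp i j (pvBCell grid k K dp i j)) B2) := by
    intro i hi js
    induction js with
    | nil => intro _ A2 B2 h; exact h
    | cons j t ih =>
      intro hjs A2 B2 h
      simp only [List.foldl_cons]
      by_cases hz : i = 0 ∧ j = 0
      · rw [if_pos hz, if_pos hz]
        exact ih (fun x hx => hjs x (List.mem_cons_of_mem _ hx)) A2 B2 h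
      · rw [if_neg hz, if_neg hz]
        exact ih (fun x hx => hjs x (List.mem_cons_of_mem _ hx)) _ _
          (pv_tab_step grid k m n K hK A2 B2 h i j hi (hjs j (List.mem_cons_self)) hz)
  intro is
  induction is with
  | nil => intro A2 B2 _ h; exact h
  | cons i t ih =>
    intro A2 B2 his h
    simp only [List.foldl_cons]
    exact ih _ _ (fun x hx => his x (List.mem_cons_of_mem _ hx))
      (hcols i (his i (List.mem_cons_self)) (List.range n) (fun j hj => List.mem_range.mp hj) A2 B2 h)

theorem pv_init (m n K : Nat) (hm : 0 < m) (hn : 0 < n) :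
    pvTabInv m n K
      (pvSet2 (List.replicate m (List.replicate n (PySem.Dict.empty : PySem.Dict Int Int)))
        0 0 (PySem.Dict.mk [(0, 0)]))
      (pvSet2 (List.replicate m (List.replicate n (List.replicate (K + 1) (none : Option Int))))
        0 0 ((List.replicate (K + 1) (none : Option Int)).set 0 (some 0))) := by
  have hcell0 : (List.replicate (K + 1) (none : Option Int)).set 0 (some 0)
      = some 0 :: List.replicate K none := by
    rw [List.replicate_succ, List.set_cons_zero]
  refine ⟨?_, ?_, ?_, ?_⟩
  · rw [pvSet2, List.length_set, List.length_replicate]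
  · rw [pvSet2, List.length_set, List.length_replicate]
  · intro i' hi'
    rw [pv_row_len_set2, pv_row_len_set2, pv_getD_replicate, pv_getD_replicate,
      if_pos hi', if_pos hi', List.length_replicate, List.length_replicate]
    exact ⟨rfl, rfl⟩
  · intro i' j' hi' hj'
    by_cases hz : i' = 0 ∧ j' = 0
    · obtain ⟨rfl, rfl⟩ := hz
      rw [pv_get2_set2_self _ _ _ _ _ (by simpa using hm)
          (by rw [pv_getD_replicate, if_pos hm, List.length_replicate]; exact hn),
        pv_get2_set2_self _ _ _ _ _ (by simpa using hm)
          (by rw [pv_getD_replicate, if_pos hm, List.length_replicate]; exact hn)]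
      refine ⟨?_, by rw [hcell0]; simp, ?_⟩
      · rw [hcell0, pvItemsFrom, pv_itemsFrom_replicate]
        rfl
      · intro c hc
        rw [hcell0] at hc
        cases c with
        | zero => omega
        | succ c =>
          rw [List.getD_cons_succ, pv_getD_replicate] at hc
          split at hc <;> simp at hc
    · rw [pv_get2_set2_ne _ _ _ _ _ _ _ hz, pv_get2_set2_ne _ _ _ _ _ _ _ hz,
        pv_get2_replicate _ _ _ _ _ _ hi' hj', pv_get2_replicate _ _ _ _ _ _ hi' hj']
      refine ⟨by rw [pv_itemsFrom_replicate]; rfl, List.length_replicate, ?_⟩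
      intro c hc
      rw [pv_getD_replicate] at hc
      split at hc <;> simp at hc

theorem pv_bbest_filter (cell : List (Option Int)) : ∀ acc : Option Int,
    cell.foldl
      (fun acc o =>
        match o with
        | none => acc
        | some s =>
          match acc with
          | none => some s
          | some b => if s > b then some s else acc)
      acc
    = (cell.filterMap id).foldl
        (fun acc s =>
          match acc with
          | none => some s
          | some b => if s > b then some s else acc)
        acc := by
  induction cell with
  | nil => intro acc; rfl
  | cons o r ih =>
    intro acc
    cases o with
    | none => simpa using ih acc
    | some s => simpa using ih _

theorem pv_optmax (t : List Int) : ∀ x : Int,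
    t.foldl
      (fun acc s =>
        match acc with
        | none => some s
        | some b => if s > b then some s else acc)
      (some x)
    = some (t.foldl max x) := by
  induction t with
  | nil => intro x; rfl
  | cons s r ih =>
    intro x
    simp only [List.foldl_cons]
    have : (if s > x then some s else some x) = some (max x s) := by
      split_ifs with hx
      · rw [max_eq_right hx.le]
      · rw [max_eq_left (not_lt.mp hx)]
    rw [this, ih]

theorem pv_final (d : PySem.Dict Int Int) (cell : List (Option Int))
    (h : d.items = pvItemsFrom 0 cell) :
    (if d.items = [] then (-1 : Int) else (PySem.List.max? d.values (fun x => x)).getD 0)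
      = (match pvBBest cell with | none => -1 | some b => b) := by
  have hv : d.values = cell.filterMap id := by
    show d.items.map Prod.snd = _
    rw [h, pv_snd_itemsFrom]
  rw [pvBBest, pv_bbest_filter cell none]
  cases hfm : cell.filterMap id with
  | nil =>
    rw [if_pos (by rw [h, pv_itemsFrom_eq_nil_iff]; exact hfm)]
    rfl
  | cons x t =>
    rw [if_neg (by rw [h]; intro hnil; rw [(pv_itemsFrom_eq_nil_iff cell 0).mp hnil] at hfm; simp at hfm)]
    rw [hv, hfm, PySem.List.max?_id_cons]
    rw [show (List.foldl
        (fun acc s =>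
          match acc with
          | none => some s
          | some b => if s > b then some s else acc)
        none (x :: t)) = some (List.foldl max x t) from by
      simp only [List.foldl_cons]
      exact pv_optmax t x]
    rfl

-- ===== new machinery: "at most b nonzero cells" semantics linking the dense model and port B =====

def pvOmax (x y : Option Int) : Option Int :=
  match x, y with
  | none, y => y
  | x, none => x
  | some a, some b => some (max a b)

-- best stored score among cost indices 0..b of a dense cell
def pvAtM (cell : List (Option Int)) (b : Nat) : Option Int :=
  (List.range (b + 1)).foldl (fun a c => pvOmax a (cell.getD c none)) none

-- "at most b" layer function: one layer of the intended semantics (prev = previous layer)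
def pvTb (grid : List (List Int)) (prev : Nat → Nat → Option Int) : Nat → Nat → Option Int
  | i, j =>
    if i = 0 ∧ j = 0 then some 0
    else
      match (if (grid.getD i []).getD j 0 = 0 then
               pvOmax (if h : i = 0 then none else pvTb grid prev (i - 1) j)
                      (if h : j = 0 then none else pvTb grid prev i (j - 1))
             else
               pvOmax (if i = 0 then none else prev (i - 1) j)
                      (if j = 0 then none else prev i (j - 1))) with
      | none => none
      | some s => if s + (grid.getD i []).getD j 0 < 0 then none
                  else some (s + (grid.getD i []).getD j 0)
  termination_by i j => i + j
  decreasing_by all_goals omega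

def pvTL (grid : List (List Int)) : Nat → Nat → Nat → Option Int
  | 0 => pvTb grid (fun _ _ => none)
  | b + 1 => pvTb grid (pvTL grid b)

-- dense-model spec: what pvBCell computes, cell by cell
def pvCellFrom (grid : List (List Int)) (k : Int) (K : Nat) (i j : Nat)
    (up lf : List (Option Int)) : List (Option Int) :=
  let val := (grid.getD i []).getD j 0
  let cost : Nat := if val = 0 then 0 else 1
  pvBPrune ((List.range (K + 1 - cost)).foldl (pvBUpd k val cost lf)
    ((List.range (K + 1 - cost)).foldl (pvBUpd k val cost up) (List.replicate (K + 1) none)))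

def pvDSpec (grid : List (List Int)) (k : Int) (K : Nat) : Nat → Nat → List (Option Int)
  | i, j =>
    if i = 0 ∧ j = 0 then (List.replicate (K + 1) (none : Option Int)).set 0 (some 0)
    else
      let up := if h : i = 0 then List.replicate (K + 1) (none : Option Int) else pvDSpec grid k K (i - 1) j
      let lf := if h : j = 0 then List.replicate (K + 1) (none : Option Int) else pvDSpec grid k K i (j - 1)
      pvCellFrom grid k K i j up lf
  termination_by i j => i + j
  decreasing_by all_goals omega

def pvDims {α : Type} (m n : Nat) (t : List (List α)) : Prop :=
  t.length = m ∧ ∀ i, i < m → (t.getD i []).length = n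

theorem pv_omax_none_right (x : Option Int) : pvOmax x none = x := by cases x <;> rfl

theorem pv_omax_assoc (a b c : Option Int) : pvOmax (pvOmax a b) c = pvOmax a (pvOmax b c) := by
  cases a <;> cases b <;> cases c <;> simp [pvOmax, max_assoc]

theorem pv_omax_interchange (a b c d : Option Int) :
    pvOmax (pvOmax a b) (pvOmax c d) = pvOmax (pvOmax a c) (pvOmax b d) := by
  cases a <;> cases b <;> cases c <;> cases d <;> simp [pvOmax, max_comm, max_left_comm]

theorem pv_omax_map_add (a b : Option Int) (v : Int) :
    (pvOmax a b).map (fun s => s + v) = pvOmax (a.map (fun s => s + v)) (b.map (fun s => s + v)) := by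
  cases a <;> cases b <;> simp [pvOmax] <;> omega

theorem pv_atM_zero (cell : List (Option Int)) : pvAtM cell 0 = cell.getD 0 none := by
  simp [pvAtM, pvOmax]

theorem pv_atM_succ (cell : List (Option Int)) (b : Nat) :
    pvAtM cell (b + 1) = pvOmax (pvAtM cell b) (cell.getD (b + 1) none) := by
  rw [pvAtM, pvAtM, List.range_succ, List.foldl_append, List.foldl_cons, List.foldl_nil]

theorem pv_atM_none (cell : List (Option Int)) (h : ∀ c, cell.getD c none = none) (b : Nat) :
    pvAtM cell b = none := by
  induction b with
  | zero => rw [pv_atM_zero, h]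
  | succ b ih => rw [pv_atM_succ, ih, h]; rfl

theorem pv_atM_replicate (t b : Nat) : pvAtM (List.replicate t (none : Option Int)) b = none := by
  apply pv_atM_none
  intro c
  rw [pv_getD_replicate]
  split <;> rfl

theorem pv_atM_cons (o : Option Int) (r : List (Option Int)) (b : Nat) :
    pvAtM (o :: r) (b + 1) = pvOmax o (pvAtM r b) := by
  induction b with
  | zero =>
    rw [pv_atM_succ, pv_atM_zero, pv_atM_zero]
    rfl
  | succ b ih =>
    rw [pv_atM_succ, ih, pv_atM_succ]
    show pvOmax (pvOmax o (pvAtM r b)) (r.getD (b + 1) none) = _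
    rw [pv_omax_assoc]

theorem pv_atM_stable (cell : List (Option Int)) (b0 : Nat)
    (h : ∀ c, b0 < c → cell.getD c none = none) :
    ∀ b, b0 ≤ b → pvAtM cell b = pvAtM cell b0 := by
  intro b
  induction b with
  | zero =>
    intro hb
    have hb0 : b0 = 0 := by omega
    rw [hb0]
  | succ b ih =>
    intro hb
    by_cases he : b0 = b + 1
    · rw [he]
    · have : b0 ≤ b := by omega
      rw [pv_atM_succ, ih this, h (b + 1) (by omega), pv_omax_none_right]

theorem pv_atM_start (K b : Nat) :
    pvAtM ((List.replicate (K + 1) (none : Option Int)).set 0 (some 0)) b = some 0 := by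
  have h0 : ((List.replicate (K + 1) (none : Option Int)).set 0 (some 0)).getD 0 none = some 0 := by
    rw [pv_getD_set]
    simp
  have hc : ∀ c, 0 < c → ((List.replicate (K + 1) (none : Option Int)).set 0 (some 0)).getD c none = none := by
    intro c hcpos
    rw [pv_getD_set, if_neg (by omega), pv_getD_replicate]
    split <;> rfl
  rw [pv_atM_stable _ 0 hc b (by omega), pv_atM_zero, h0]


def pvMerge (val : Int) (x p : Option Int) : Option Int :=
  match p with
  | none => x
  | some s =>
    match x with
    | none => some (s + val)
    | some v => if v < s + val then some (s + val) else some v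

theorem pv_bupd_none (k val : Int) (cost : Nat) (pred cell : List (Option Int)) (c : Nat)
    (hp : pred.getD c none = none) : pvBUpd k val cost pred cell c = cell := by
  simp only [pvBUpd, hp]

theorem pv_bupd_some_none (k val : Int) (cost : Nat) (pred cell : List (Option Int)) (c : Nat)
    (s : Int) (hp : pred.getD c none = some s) (hg : ¬ ((c : Int) + (cost : Int) > k))
    (hc : cell.getD (c + cost) none = none) :
    pvBUpd k val cost pred cell c = cell.set (c + cost) (some (s + val)) := by
  simp only [pvBUpd, hp, hc]
  rw [if_neg hg]

theorem pv_bupd_some_some (k val : Int) (cost : Nat) (pred cell : List (Option Int)) (c : Nat)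
    (s v : Int) (hp : pred.getD c none = some s) (hg : ¬ ((c : Int) + (cost : Int) > k))
    (hc : cell.getD (c + cost) none = some v) :
    pvBUpd k val cost pred cell c
      = if v < s + val then cell.set (c + cost) (some (s + val)) else cell := by
  simp only [pvBUpd, hp, hc]
  rw [if_neg hg]

theorem pv_bupd_guard (k val : Int) (cost : Nat) (pred cell : List (Option Int)) (c : Nat)
    (s : Int) (hp : pred.getD c none = some s) (hg : (c : Int) + (cost : Int) > k) :
    pvBUpd k val cost pred cell c = cell := by
  simp only [pvBUpd, hp]
  rw [if_pos hg]

theorem pv_bupd_length (k val : Int) (cost : Nat) (pred cell : List (Option Int)) (c : Nat) :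
    (pvBUpd k val cost pred cell c).length = cell.length := by
  cases hp : pred.getD c none with
  | none => rw [pv_bupd_none k val cost pred cell c hp]
  | some s =>
    by_cases hg : (c : Int) + (cost : Int) > k
    · rw [pv_bupd_guard k val cost pred cell c s hp hg]
    · cases hc : cell.getD (c + cost) none with
      | none => rw [pv_bupd_some_none k val cost pred cell c s hp hg hc, List.length_set]
      | some v =>
        rw [pv_bupd_some_some k val cost pred cell c s v hp hg hc]
        split
        · rw [List.length_set]
        · rfl

theorem pv_bupd_fold_length (k val : Int) (cost : Nat) (pred : List (Option Int)) :
    ∀ (L : List Nat) (cell : List (Option Int)),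
    (L.foldl (pvBUpd k val cost pred) cell).length = cell.length := by
  intro L
  induction L with
  | nil => intro cell; rfl
  | cons c t ih =>
    intro cell
    rw [List.foldl_cons, ih, pv_bupd_length]

theorem pv_bupd_fold_getD (k val : Int) (cost K : Nat) (hkK : (K : Int) ≤ k)
    (pred : List (Option Int)) :
    ∀ (len c0 : Nat), c0 + len + cost ≤ K + 1 →
    ∀ (cell0 : List (Option Int)), cell0.length = K + 1 → ∀ idx,
    ((List.range' c0 len).foldl (pvBUpd k val cost pred) cell0).getD idx none
      = if c0 + cost ≤ idx ∧ idx < c0 + len + cost then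
          pvMerge val (cell0.getD idx none) (pred.getD (idx - cost) none)
        else cell0.getD idx none := by
  intro len
  induction len with
  | zero =>
    intro c0 _ cell0 _ idx
    rw [List.range'_zero, List.foldl_nil, if_neg (by omega)]
  | succ len ih =>
    intro c0 hlen cell0 hc0len idx
    rw [List.range'_succ, List.foldl_cons]
    have hguard : ¬ ((c0 : Int) + (cost : Int) > k) := by
      have h1 : c0 + cost ≤ K := by omega
      have : ((c0 + cost : Nat) : Int) ≤ (K : Int) := by exact_mod_cast h1
      push_cast at this
      omega
    have hstep : ∀ idx', (pvBUpd k val cost pred cell0 c0).getD idx' none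
        = if idx' = c0 + cost then pvMerge val (cell0.getD idx' none) (pred.getD c0 none)
          else cell0.getD idx' none := by
      intro idx'
      cases hp : pred.getD c0 none with
      | none =>
        rw [pv_bupd_none k val cost pred cell0 c0 hp]
        simp only [pvMerge]
        split <;> rfl
      | some s =>
        cases hc : cell0.getD (c0 + cost) none with
        | none =>
          rw [pv_bupd_some_none k val cost pred cell0 c0 s hp hguard hc, pv_getD_set]
          by_cases hidx : idx' = c0 + cost
          · rw [if_pos ⟨hidx.symm, by omega⟩, if_pos hidx, hidx, hc]
            rfl
          · rw [if_neg (by intro hcon; exact hidx hcon.1.symm), if_neg hidx]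
        | some v =>
          rw [pv_bupd_some_some k val cost pred cell0 c0 s v hp hguard hc]
          by_cases hv : v < s + val
          · rw [if_pos hv, pv_getD_set]
            by_cases hidx : idx' = c0 + cost
            · rw [if_pos ⟨hidx.symm, by omega⟩, if_pos hidx, hidx, hc]
              simp only [pvMerge]
              rw [if_pos hv]
            · rw [if_neg (by intro hcon; exact hidx hcon.1.symm), if_neg hidx]
          · rw [if_neg hv]
            by_cases hidx : idx' = c0 + cost
            · rw [if_pos hidx, hidx, hc]
              simp only [pvMerge]
              rw [if_neg hv]
            · rw [if_neg hidx]
    have hlen1 : (pvBUpd k val cost pred cell0 c0).length = K + 1 := by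
      rw [pv_bupd_length, hc0len]
    rw [ih (c0 + 1) (by omega) _ hlen1 idx]
    by_cases h1 : idx = c0 + cost
    · rw [if_neg (by omega), hstep, if_pos h1, if_pos (by omega), h1]
      congr 2
      omega
    · by_cases h2 : c0 + 1 + cost ≤ idx ∧ idx < c0 + 1 + len + cost
      · rw [if_pos h2, if_pos (by omega), hstep, if_neg h1]
      · rw [if_neg h2, hstep, if_neg h1, if_neg (by omega)]

theorem pv_merge_merge (val : Int) (a b : Option Int) :
    pvMerge val (pvMerge val none a) b = (pvOmax a b).map (fun s => s + val) := by
  cases a <;> cases b <;> simp only [pvMerge, pvOmax, Option.map] <;> try rfl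
  split_ifs <;> simp_all <;> omega

theorem pv_cand_getD (k val : Int) (cost K : Nat)
    (hcost : cost ≤ 1) (hkK : (K : Int) ≤ k) (up lf : List (Option Int)) (idx : Nat) :
    (((List.range (K + 1 - cost)).foldl (pvBUpd k val cost lf)
      ((List.range (K + 1 - cost)).foldl (pvBUpd k val cost up)
        (List.replicate (K + 1) (none : Option Int)))).getD idx none)
      = if cost ≤ idx ∧ idx ≤ K then
          (pvOmax (up.getD (idx - cost) none) (lf.getD (idx - cost) none)).map (fun s => s + val)
        else none := by
  have hrep : ∀ c : Nat, (List.replicate (K + 1) (none : Option Int)).getD c none = none := by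
    intro c
    rw [pv_getD_replicate]
    split <;> rfl
  rw [List.range_eq_range']
  have hlenmid : ((List.range' 0 (K + 1 - cost)).foldl (pvBUpd k val cost up)
      (List.replicate (K + 1) (none : Option Int))).length = K + 1 := by
    rw [pv_bupd_fold_length]
    exact List.length_replicate
  have hmid : ∀ idx', ((List.range' 0 (K + 1 - cost)).foldl (pvBUpd k val cost up)
      (List.replicate (K + 1) (none : Option Int))).getD idx' none
      = if cost ≤ idx' ∧ idx' < K + 1 then pvMerge val none (up.getD (idx' - cost) none) else none := by
    intro idx'
    rw [pv_bupd_fold_getD k val cost K hkK up (K + 1 - cost) 0 (by omega) _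
      List.length_replicate idx']
    by_cases h : cost ≤ idx' ∧ idx' < K + 1
    · rw [if_pos (by omega), if_pos h, hrep]
    · rw [if_neg (by omega), if_neg h]
      exact hrep idx'
  rw [pv_bupd_fold_getD k val cost K hkK lf (K + 1 - cost) 0 (by omega) _ hlenmid idx]
  by_cases h : cost ≤ idx ∧ idx ≤ K
  · rw [if_pos (by omega), hmid, if_pos (by omega), pv_merge_merge, if_pos h]
  · rw [if_neg (by omega), hmid, if_neg (by omega), if_neg h]

theorem pv_atM_cand (cand up lf : List (Option Int)) (val : Int) (cost K : Nat)
    (hcost : cost ≤ 1)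
    (hc : ∀ idx, cand.getD idx none
      = if cost ≤ idx ∧ idx ≤ K then
          (pvOmax (up.getD (idx - cost) none) (lf.getD (idx - cost) none)).map (fun s => s + val)
        else none) :
    ∀ b, b ≤ K → pvAtM cand b
      = if b < cost then none
        else (pvOmax (pvAtM up (b - cost)) (pvAtM lf (b - cost))).map (fun s => s + val) := by
  have hcost' : cost = 0 ∨ cost = 1 := by omega
  rcases hcost' with h0 | h1
  · subst h0
    intro b
    induction b with
    | zero =>
      intro hb
      rw [if_neg (by omega), pv_atM_zero, hc 0, if_pos (by omega), pv_atM_zero, pv_atM_zero]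
    | succ b ih =>
      intro hb
      rw [if_neg (by omega), pv_atM_succ, ih (by omega), if_neg (by omega), hc (b + 1),
        if_pos (by omega), ← pv_omax_map_add, pv_omax_interchange]
      simp only [Nat.sub_zero]
      rw [← pv_atM_succ, ← pv_atM_succ]
  · subst h1
    intro b
    induction b with
    | zero =>
      intro hb
      rw [if_pos (by omega), pv_atM_zero, hc 0, if_neg (by omega)]
    | succ b ih =>
      intro hb
      rw [if_neg (by omega), pv_atM_succ, hc (b + 1), if_pos (by omega)]
      cases b with
      | zero =>
        rw [pv_atM_zero cand, hc 0, if_neg (by omega), pv_atM_zero, pv_atM_zero]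
        rfl
      | succ b' =>
        rw [ih (by omega), if_neg (by omega), ← pv_omax_map_add, pv_omax_interchange]
        simp only [Nat.add_sub_cancel]
        rw [← pv_atM_succ, ← pv_atM_succ]

def pvRunMax (run : Int) (cand : List (Option Int)) : Nat → Int
  | 0 => run
  | c + 1 =>
    match pvAtM cand c with
    | none => run
    | some t => max run t

theorem pv_go_getD (cand : List (Option Int)) : ∀ (run : Int) (c : Nat),
    (pvBPruneGo run cand).getD c none
      = match cand.getD c none with
        | none => none
        | some s => if s > pvRunMax run cand c then some s else none := by
  induction cand with
  | nil =>
    intro run c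
    simp [pvBPruneGo]
  | cons o r ih =>
    intro run c
    cases o with
    | none =>
      rw [show pvBPruneGo run (none :: r) = none :: pvBPruneGo run r from rfl]
      cases c with
      | zero => rfl
      | succ c =>
        rw [List.getD_cons_succ, List.getD_cons_succ, ih run c]
        have hrm : pvRunMax run (none :: r) (c + 1) = pvRunMax run r c := by
          cases c with
          | zero =>
            show (match pvAtM (none :: r) 0 with | none => run | some t => max run t) = run
            rw [pv_atM_zero]
            rfl
          | succ c' =>
            show (match pvAtM (none :: r) (c' + 1) with | none => run | some t => max run t)
              = (match pvAtM r c' with | none => run | some t => max run t)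
            rw [pv_atM_cons]
            rfl
        rw [hrm]
    | some s =>
      by_cases h : s > run
      · rw [show pvBPruneGo run (some s :: r) = some s :: pvBPruneGo s r from by
          rw [pvBPruneGo, if_pos h]]
        cases c with
        | zero =>
          show some s = if s > pvRunMax run (some s :: r) 0 then some s else none
          rw [show pvRunMax run (some s :: r) 0 = run from rfl, if_pos h]
        | succ c =>
          rw [List.getD_cons_succ, List.getD_cons_succ, ih s c]
          have hrm : pvRunMax run (some s :: r) (c + 1) = pvRunMax s r c := by
            cases c with
            | zero =>
              show (match pvAtM (some s :: r) 0 with | none => run | some t => max run t) = s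
              rw [pv_atM_zero, List.getD_cons_zero]
              show max run s = s
              exact max_eq_right h.le
            | succ c' =>
              show (match pvAtM (some s :: r) (c' + 1) with | none => run | some t => max run t)
                = (match pvAtM r c' with | none => s | some t => max s t)
              rw [pv_atM_cons]
              cases hA : pvAtM r c' with
              | none =>
                show max run s = s
                exact max_eq_right h.le
              | some u =>
                show max run (max s u) = max s u
                rw [max_eq_right]
                exact le_trans h.le (le_max_left s u)
          rw [hrm]
      · rw [show pvBPruneGo run (some s :: r) = none :: pvBPruneGo run r from by
          rw [pvBPruneGo, if_neg h]]
        cases c with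
        | zero =>
          show (none : Option Int) = if s > pvRunMax run (some s :: r) 0 then some s else none
          rw [show pvRunMax run (some s :: r) 0 = run from rfl, if_neg h]
        | succ c =>
          rw [List.getD_cons_succ, List.getD_cons_succ, ih run c]
          have hrm : pvRunMax run (some s :: r) (c + 1) = pvRunMax run r c := by
            have hsr : max run s = run := max_eq_left (by omega)
            cases c with
            | zero =>
              show (match pvAtM (some s :: r) 0 with | none => run | some t => max run t) = run
              rw [pv_atM_zero, List.getD_cons_zero]
              exact hsr
            | succ c' =>
              show (match pvAtM (some s :: r) (c' + 1) with | none => run | some t => max run t)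
                = (match pvAtM r c' with | none => run | some t => max run t)
              rw [pv_atM_cons]
              cases hA : pvAtM r c' with
              | none => exact hsr
              | some u =>
                show max run (max s u) = max run u
                rw [← max_assoc, hsr]
          rw [hrm]

theorem pv_go_atM (cand : List (Option Int)) (run : Int) : ∀ b,
    pvAtM (pvBPruneGo run cand) b
      = match pvAtM cand b with
        | none => none
        | some s => if s > run then some s else none := by
  intro b
  induction b with
  | zero =>
    rw [pv_atM_zero, pv_atM_zero, pv_go_getD]
    rfl
  | succ b ih =>
    rw [pv_atM_succ, pv_atM_succ, ih, pv_go_getD cand run (b + 1)]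
    have hrm : pvRunMax run cand (b + 1)
        = (match pvAtM cand b with | none => run | some t => max run t) := rfl
    rw [hrm]
    cases hX : pvAtM cand b with
    | none =>
      cases hy : cand.getD (b + 1) none with
      | none => rfl
      | some s => rfl
    | some t =>
      cases hy : cand.getD (b + 1) none with
      | none =>
        show pvOmax (if t > run then some t else none) none = _
        rw [pv_omax_none_right]
        rfl
      | some s =>
        show pvOmax (if t > run then some t else none) (if s > max run t then some s else none)
          = if max t s > run then some (max t s) else none
        by_cases ht : t > run
        · rw [if_pos ht, max_eq_right ht.le]
          by_cases hs : s > t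
          · rw [if_pos hs, if_pos (show max t s > run from by
              have := le_max_left t s; omega)]
            rfl
          · rw [if_neg hs, pv_omax_none_right, if_pos (show max t s > run from by
              have := le_max_left t s; omega), max_eq_left (by omega)]
        · rw [if_neg ht, max_eq_left (show t ≤ run from by omega)]
          by_cases hs : s > run
          · rw [if_pos hs, if_pos (show max t s > run from by
              have := le_max_right t s; omega), max_eq_right (show t ≤ s from by omega)]
            rfl
          · rw [if_neg hs, if_neg (show ¬ max t s > run from by
              have h1 : t ≤ run := by omega
              have h2 : s ≤ run := by omega
              have := max_le h1 h2
              omega)]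
            rfl

theorem pv_bbest_eq_foldl (cell : List (Option Int)) : pvBBest cell = cell.foldl pvOmax none := by
  rw [pvBBest]
  suffices h : ∀ acc : Option Int, cell.foldl
      (fun acc o =>
        match o with
        | none => acc
        | some s =>
          match acc with
          | none => some s
          | some b => if s > b then some s else acc)
      acc = cell.foldl pvOmax acc from h none
  induction cell with
  | nil => intro acc; rfl
  | cons o r ih =>
    intro acc
    rw [List.foldl_cons, List.foldl_cons]
    have hstep : (match o with
        | none => acc
        | some s =>
          match acc with
          | none => some s
          | some b => if s > b then some s else acc) = pvOmax acc o := by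
      cases o with
      | none => rw [pv_omax_none_right]
      | some s =>
        cases acc with
        | none => rfl
        | some b =>
          show (if s > b then some s else some b) = some (max b s)
          by_cases h : s > b
          · rw [if_pos h, max_eq_right h.le]
          · rw [if_neg h, max_eq_left (by omega)]
    rw [hstep, ih]

theorem pv_foldl_omax_start (l : List (Option Int)) : ∀ (a x : Option Int),
    l.foldl pvOmax (pvOmax a x) = pvOmax a (l.foldl pvOmax x) := by
  induction l with
  | nil => intro a x; rfl
  | cons o r ih =>
    intro a x
    rw [List.foldl_cons, List.foldl_cons, pv_omax_assoc, ih]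

theorem pv_atM_full (cell : List (Option Int)) : ∀ b, cell.length ≤ b + 1 →
    pvAtM cell b = cell.foldl pvOmax none := by
  induction cell with
  | nil =>
    intro b _
    rw [List.foldl_nil]
    exact pv_atM_none [] (fun c => by simp) b
  | cons o r ih =>
    intro b hb
    cases b with
    | zero =>
      have hr : r = [] := by
        have h1 : r.length = 0 := by simp only [List.length_cons] at hb; omega
        exact List.eq_nil_of_length_eq_zero h1
      subst hr
      rw [pv_atM_zero]
      rfl
    | succ b =>
      rw [pv_atM_cons, List.foldl_cons, ih b (by simp only [List.length_cons] at hb; omega)]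
      rw [show pvOmax none o = o from rfl, show o = pvOmax o none from (pv_omax_none_right o).symm]
      rw [pv_foldl_omax_start]
      rw [pv_omax_none_right]

theorem pv_set2_dims {α : Type} (m n : Nat) (t : List (List α)) (i j : Nat) (x : α)
    (h : pvDims m n t) : pvDims m n (pvSet2 t i j x) := by
  obtain ⟨h1, h2⟩ := h
  refine ⟨by rw [pvSet2, List.length_set, h1], ?_⟩
  intro i' hi'
  rw [pv_row_len_set2]
  exact h2 i' hi'

theorem pv_fold_spec {α : Type} (d : α) (m n : Nat) (F : List (List α) → Nat → Nat → α)
    (spec : Nat → Nat → α) (t0 : List (List α)) (hd0 : pvDims m n t0)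
    (h00 : pvGet2 t0 0 0 d = spec 0 0)
    (hstep : ∀ t i j, pvDims m n t → i < m → j < n → ¬(i = 0 ∧ j = 0) →
      (∀ i' j', i' < m → j' < n → ((i' = 0 ∧ j' = 0) ∨ i' < i ∨ (i' = i ∧ j' < j)) →
        pvGet2 t i' j' d = spec i' j') → F t i j = spec i j) :
    ∀ i j, i < m → j < n →
    pvGet2 ((List.range m).foldl (fun t i => (List.range n).foldl
      (fun t j => if i = 0 ∧ j = 0 then t else pvSet2 t i j (F t i j)) t) t0) i j d = spec i j := by
  set P : Nat → Nat → List (List α) → Prop := fun i0 j0 t =>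
    pvDims m n t ∧ ∀ i' j', i' < m → j' < n →
      ((i' = 0 ∧ j' = 0) ∨ i' < i0 ∨ (i' = i0 ∧ j' < j0)) → pvGet2 t i' j' d = spec i' j'
    with hP
  have hcols : ∀ i0, i0 < m → ∀ (len j0 : Nat), j0 + len ≤ n → ∀ t, P i0 j0 t →
      P i0 (j0 + len) ((List.range' j0 len).foldl
        (fun t j => if i0 = 0 ∧ j = 0 then t else pvSet2 t i0 j (F t i0 j)) t) := by
    intro i0 hi0 len
    induction len with
    | zero => intro j0 _ t h; simpa using h
    | succ len ih =>
      intro j0 hj0 t h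
      rw [List.range'_succ, List.foldl_cons]
      have hnext : P i0 (j0 + 1) (if i0 = 0 ∧ j0 = 0 then t else pvSet2 t i0 j0 (F t i0 j0)) := by
        by_cases hz : i0 = 0 ∧ j0 = 0
        · rw [if_pos hz]
          refine ⟨h.1, ?_⟩
          intro i' j' hi' hj' hcl
          apply h.2 i' j' hi' hj'
          rcases hcl with hs | hlt | ⟨he, hj⟩
          · exact Or.inl hs
          · exact Or.inr (Or.inl hlt)
          · by_cases hjj : j' < j0
            · exact Or.inr (Or.inr ⟨he, hjj⟩)
            · have : j' = j0 := by omega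
              exact Or.inl (by omega)
        · rw [if_neg hz]
          refine ⟨pv_set2_dims m n t i0 j0 _ h.1, ?_⟩
          intro i' j' hi' hj' hcl
          by_cases hsame : i' = i0 ∧ j' = j0
          · obtain ⟨rfl, rfl⟩ := hsame
            rw [pv_get2_set2_self _ _ _ _ _ (by rw [h.1.1]; exact hi0)
              (by rw [h.1.2 _ hi0]; omega)]
            exact hstep t _ _ h.1 hi0 (by omega) hz h.2
          · rw [pv_get2_set2_ne _ _ _ _ _ _ _ hsame]
            apply h.2 i' j' hi' hj'
            rcases hcl with hs | hlt | ⟨he, hj⟩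
            · exact Or.inl hs
            · exact Or.inr (Or.inl hlt)
            · have : j' < j0 := by
                rcases Nat.lt_or_ge j' j0 with hh | hh
                · exact hh
                · exfalso; exact hsame ⟨he, by omega⟩
              exact Or.inr (Or.inr ⟨he, this⟩)
      have := ih (j0 + 1) (by omega) _ hnext
      rw [show j0 + 1 + len = j0 + (len + 1) from by omega] at this
      exact this
  have hrows : ∀ (len i0 : Nat), i0 + len ≤ m → ∀ t, P i0 0 t →
      P (i0 + len) 0 ((List.range' i0 len).foldl
        (fun t i => (List.range n).foldl
          (fun t j => if i = 0 ∧ j = 0 then t else pvSet2 t i j (F t i j)) t) t) := by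
    intro len
    induction len with
    | zero => intro i0 _ t h; simpa using h
    | succ len ih =>
      intro i0 hi0 t h
      rw [List.range'_succ, List.foldl_cons]
      have hinner := hcols i0 (by omega) n 0 (by omega) t h
      rw [← List.range_eq_range'] at hinner
      have hmid : P (i0 + 1) 0 ((List.range n).foldl
          (fun t j => if i0 = 0 ∧ j = 0 then t else pvSet2 t i0 j (F t i0 j)) t) := by
        refine ⟨hinner.1, ?_⟩
        intro i' j' hi' hj' hcl
        apply hinner.2 i' j' hi' hj'
        rcases hcl with hs | hlt | ⟨_, hj⟩
        · exact Or.inl hs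
        · by_cases hii : i' < i0
          · exact Or.inr (Or.inl hii)
          · have : i' = i0 := by omega
            exact Or.inr (Or.inr ⟨this, by omega⟩)
        · omega
      have := ih (i0 + 1) (by omega) _ hmid
      rw [show i0 + 1 + len = i0 + (len + 1) from by omega] at this
      exact this
  intro i j hi hj
  have h0 : P 0 0 t0 := by
    refine ⟨hd0, ?_⟩
    intro i' j' hi' hj' hcl
    rcases hcl with ⟨rfl, rfl⟩ | hlt | ⟨_, hj⟩
    · exact h00
    · omega
    · omega
  have hfin := hrows m 0 (by omega) t0 h0
  rw [← List.range_eq_range'] at hfin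
  exact hfin.2 i j hi hj (Or.inr (Or.inl (by omega)))

theorem pv_bupd_fold_nonepred (k val : Int) (cost t : Nat) :
    ∀ (L : List Nat) (cell : List (Option Int)),
    L.foldl (pvBUpd k val cost (List.replicate t (none : Option Int))) cell = cell := by
  intro L
  induction L with
  | nil => intro cell; rfl
  | cons c L ih =>
    intro cell
    rw [List.foldl_cons, pv_bupd_none k val cost _ cell c (by
      rw [pv_getD_replicate]; split <;> rfl), ih]

theorem pv_dspec_step (grid : List (List Int)) (k : Int) (K m n : Nat)
    (t : List (List (List (Option Int)))) (i j : Nat) (hi : i < m) (hj : j < n)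
    (hij : ¬(i = 0 ∧ j = 0))
    (hpred : ∀ i' j', i' < m → j' < n → ((i' = 0 ∧ j' = 0) ∨ i' < i ∨ (i' = i ∧ j' < j)) →
      pvGet2 t i' j' [] = pvDSpec grid k K i' j') :
    pvBCell grid k K t i j = pvDSpec grid k K i j := by
  have hup : 0 < i → pvGet2 t (i - 1) j [] = pvDSpec grid k K (i - 1) j := fun h =>
    hpred (i - 1) j (by omega) hj (Or.inr (Or.inl (by omega)))
  have hlf : 0 < j → pvGet2 t i (j - 1) [] = pvDSpec grid k K i (j - 1) := fun h =>
    hpred i (j - 1) hi (by omega) (Or.inr (Or.inr ⟨rfl, by omega⟩))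
  rw [pvDSpec, if_neg hij]
  simp only [pvBCell, pvCellFrom, List.foldl_cons, List.foldl_nil]
  rcases Nat.eq_zero_or_pos i with hi0 | hipos
  · subst hi0
    have hj0 : 0 < j := by omega
    have hg1 : (((0 : Nat) : Int) - 1 < 0 ∨ ((j : Nat) : Int) < 0) := by left; omega
    have hg2 : ¬(((0 : Nat) : Int) < 0 ∨ ((j : Nat) : Int) - 1 < 0) := by
      rintro (h | h) <;> omega
    rw [if_pos hg1, if_neg hg2]
    have e1 : (((j : Nat) : Int) - 1).toNat = j - 1 := by omega
    have e0 : (((0 : Nat) : Int)).toNat = 0 := by omega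
    rw [e1, e0, dif_pos rfl, dif_neg (by omega), pv_bupd_fold_nonepred, hlf hj0]
  · rcases Nat.eq_zero_or_pos j with hj0 | hjpos
    · subst hj0
      have hg1 : ¬(((i : Nat) : Int) - 1 < 0 ∨ ((0 : Nat) : Int) < 0) := by
        rintro (h | h) <;> omega
      have hg2 : (((i : Nat) : Int) < 0 ∨ ((0 : Nat) : Int) - 1 < 0) := by right; omega
      rw [if_neg hg1, if_pos hg2]
      have e1 : (((i : Nat) : Int) - 1).toNat = i - 1 := by omega
      have e0 : (((0 : Nat) : Int)).toNat = 0 := by omega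
      rw [e1, e0, dif_pos rfl, dif_neg (by omega), pv_bupd_fold_nonepred, hup hipos]
    · have hg1 : ¬(((i : Nat) : Int) - 1 < 0 ∨ ((j : Nat) : Int) < 0) := by
        rintro (h | h) <;> omega
      have hg2 : ¬(((i : Nat) : Int) < 0 ∨ ((j : Nat) : Int) - 1 < 0) := by
        rintro (h | h) <;> omega
      rw [if_neg hg1, if_neg hg2]
      have e1 : (((i : Nat) : Int) - 1).toNat = i - 1 := by omega
      have e2 : (((j : Nat) : Int) - 1).toNat = j - 1 := by omega
      have e3 : (((i : Nat) : Int)).toNat = i := by omega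
      have e4 : (((j : Nat) : Int)).toNat = j := by omega
      rw [e1, e2, e3, e4, dif_neg (by omega), dif_neg (by omega), hup hipos, hlf hjpos]

theorem pv_bupd_fold_neg (k val : Int) (cost : Nat) (hk : k < 0) (pred : List (Option Int)) :
    ∀ (L : List Nat) (cell : List (Option Int)),
    L.foldl (pvBUpd k val cost pred) cell = cell := by
  intro L
  induction L with
  | nil => intro cell; rfl
  | cons c L ih =>
    intro cell
    rw [List.foldl_cons]
    cases hp : pred.getD c none with
    | none => rw [pv_bupd_none k val cost pred cell c hp, ih]
    | some s =>
      rw [pv_bupd_guard k val cost pred cell c s hp (by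
        have h1 : (0 : Int) ≤ (c : Int) := Int.natCast_nonneg c
        have h2 : (0 : Int) ≤ (cost : Int) := Int.natCast_nonneg cost
        omega), ih]

theorem pv_go_replicate (run : Int) (t : Nat) :
    pvBPruneGo run (List.replicate t (none : Option Int)) = List.replicate t none := by
  induction t with
  | zero => rfl
  | succ t ih => rw [List.replicate_succ, pvBPruneGo, ih, ← List.replicate_succ]

theorem pv_dspec_neg (grid : List (List Int)) (k : Int) (K : Nat) (hk : k < 0) (i j : Nat)
    (hij : ¬(i = 0 ∧ j = 0)) :
    pvDSpec grid k K i j = List.replicate (K + 1) (none : Option Int) := by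
  rw [pvDSpec, if_neg hij]
  simp only [pvCellFrom]
  rw [pv_bupd_fold_neg k _ _ hk, pv_bupd_fold_neg k _ _ hk, pv_bprune_eq_go, pv_go_replicate]

theorem pv_filt_clamp (X : Option Int) (val : Int) :
    (match (X.map (fun s => s + val)) with
      | none => (none : Option Int)
      | some s => if s > -1 then some s else none)
    = match X with
      | none => none
      | some s => if s + val < 0 then none else some (s + val) := by
  cases X with
  | none => rfl
  | some s =>
    show (if s + val > -1 then some (s + val) else none) = _
    by_cases h : s + val < 0
    · rw [if_neg (by omega)]
      rw [show (match some s with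
          | none => (none : Option Int)
          | some s => if s + val < 0 then none else some (s + val)) = if s + val < 0 then none else some (s + val) from rfl, if_pos h]
    · rw [if_pos (by omega)]
      rw [show (match some s with
          | none => (none : Option Int)
          | some s => if s + val < 0 then none else some (s + val)) = if s + val < 0 then none else some (s + val) from rfl, if_neg h]

theorem pv_tl_start (grid : List (List Int)) (b : Nat) : pvTL grid b 0 0 = some 0 := by
  cases b with
  | zero =>
    show pvTb grid (fun _ _ => none) 0 0 = some 0
    rw [pvTb, if_pos ⟨rfl, rfl⟩]
  | succ b =>
    show pvTb grid (pvTL grid b) 0 0 = some 0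
    rw [pvTb, if_pos ⟨rfl, rfl⟩]

theorem pv_tl_unfold (grid : List (List Int)) (i j b : Nat) (hz : ¬(i = 0 ∧ j = 0)) :
    pvTL grid b i j =
      (if b < (if (grid.getD i []).getD j 0 = 0 then 0 else 1) then none
       else
         match pvOmax
            (if i = 0 then none
             else pvTL grid (b - (if (grid.getD i []).getD j 0 = 0 then 0 else 1)) (i - 1) j)
            (if j = 0 then none
             else pvTL grid (b - (if (grid.getD i []).getD j 0 = 0 then 0 else 1)) i (j - 1)) with
          | none => none
          | some s => if s + (grid.getD i []).getD j 0 < 0 then none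
                      else some (s + (grid.getD i []).getD j 0)) := by
  by_cases hv : (grid.getD i []).getD j 0 = 0
  · simp only [if_pos hv, Nat.sub_zero]
    rw [if_neg (by omega)]
    cases b with
    | zero =>
      show pvTb grid (fun _ _ => none) i j = _
      rw [pvTb, if_neg hz]
      simp only [if_pos hv]
      rw [show (if h : i = 0 then (none : Option Int) else pvTb grid (fun _ _ => none) (i - 1) j)
          = (if i = 0 then none else pvTL grid 0 (i - 1) j) from by
        split <;> simp_all [pvTL]]
      rw [show (if h : j = 0 then (none : Option Int) else pvTb grid (fun _ _ => none) i (j - 1))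
          = (if j = 0 then none else pvTL grid 0 i (j - 1)) from by
        split <;> simp_all [pvTL]]
    | succ b =>
      show pvTb grid (pvTL grid b) i j = _
      rw [pvTb, if_neg hz]
      simp only [if_pos hv]
      rw [show (if h : i = 0 then (none : Option Int) else pvTb grid (pvTL grid b) (i - 1) j)
          = (if i = 0 then none else pvTL grid (b + 1) (i - 1) j) from by
        split <;> simp_all [pvTL]]
      rw [show (if h : j = 0 then (none : Option Int) else pvTb grid (pvTL grid b) i (j - 1))
          = (if j = 0 then none else pvTL grid (b + 1) i (j - 1)) from by
        split <;> simp_all [pvTL]]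
  · simp only [if_neg hv]
    cases b with
    | zero =>
      rw [if_pos (by omega)]
      show pvTb grid (fun _ _ => none) i j = none
      rw [pvTb, if_neg hz]
      simp only [if_neg hv]
      rw [show (if i = 0 then (none : Option Int) else (fun _ _ => (none : Option Int)) (i - 1) j)
          = none from by split <;> rfl]
      rw [show (if j = 0 then (none : Option Int) else (fun _ _ => (none : Option Int)) i (j - 1))
          = none from by split <;> rfl]
      rfl
    | succ b =>
      rw [if_neg (by omega)]
      show pvTb grid (pvTL grid b) i j = _
      rw [pvTb, if_neg hz]
      simp only [if_neg hv, Nat.add_sub_cancel]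

theorem pv_dspec_atM (grid : List (List Int)) (k : Int) (K : Nat) (hkK : (K : Int) ≤ k) :
    ∀ (N i j b : Nat), i + j ≤ N → b ≤ K →
    pvAtM (pvDSpec grid k K i j) b = pvTL grid b i j := by
  intro N
  induction N with
  | zero =>
    intro i j b hij hb
    have h0 : i = 0 ∧ j = 0 := by omega
    obtain ⟨rfl, rfl⟩ := h0
    rw [pvDSpec, if_pos ⟨rfl, rfl⟩, pv_atM_start, pv_tl_start]
  | succ N ihN =>
    intro i j b hij hb
    by_cases hz : i = 0 ∧ j = 0
    · obtain ⟨rfl, rfl⟩ := hz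
      rw [pvDSpec, if_pos ⟨rfl, rfl⟩, pv_atM_start, pv_tl_start]
    · have hD : pvDSpec grid k K i j = pvCellFrom grid k K i j
          (if i = 0 then List.replicate (K + 1) (none : Option Int) else pvDSpec grid k K (i - 1) j)
          (if j = 0 then List.replicate (K + 1) (none : Option Int) else pvDSpec grid k K i (j - 1)) := by
        rw [pvDSpec, if_neg hz]
        simp only [dite_eq_ite]
      rw [hD]
      simp only [pvCellFrom]
      rw [pv_bprune_eq_go, pv_go_atM,
        pv_atM_cand _ _ _ ((grid.getD i []).getD j 0)
          (if (grid.getD i []).getD j 0 = 0 then 0 else 1) K (by split <;> omega)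
          (fun idx => pv_cand_getD k _ _ K (by split <;> omega) hkK _ _ idx) b hb,
        pv_tl_unfold grid i j b hz]
      by_cases hblt : b < (if (grid.getD i []).getD j 0 = 0 then 0 else 1)
      · rw [if_pos hblt, if_pos hblt]
      · rw [if_neg hblt, if_neg hblt]
        have hUP : pvAtM (if i = 0 then List.replicate (K + 1) (none : Option Int)
              else pvDSpec grid k K (i - 1) j)
              (b - (if (grid.getD i []).getD j 0 = 0 then 0 else 1))
            = (if i = 0 then none
               else pvTL grid (b - (if (grid.getD i []).getD j 0 = 0 then 0 else 1)) (i - 1) j) := by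
          by_cases h : i = 0
          · rw [if_pos h, if_pos h, pv_atM_replicate]
          · rw [if_neg h, if_neg h]
            exact ihN (i - 1) j _ (by omega) (by omega)
        have hLF : pvAtM (if j = 0 then List.replicate (K + 1) (none : Option Int)
              else pvDSpec grid k K i (j - 1))
              (b - (if (grid.getD i []).getD j 0 = 0 then 0 else 1))
            = (if j = 0 then none
               else pvTL grid (b - (if (grid.getD i []).getD j 0 = 0 then 0 else 1)) i (j - 1)) := by
          by_cases h : j = 0
          · rw [if_pos h, if_pos h, pv_atM_replicate]
          · rw [if_neg h, if_neg h]
            exact ihN i (j - 1) _ (by omega) (by omega)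
        rw [hUP, hLF]
        exact pv_filt_clamp _ _

theorem pv_tb_start (grid : List (List Int)) (pf : Nat → Nat → Option Int) :
    pvTb grid pf 0 0 = some 0 := by
  rw [pvTb, if_pos ⟨rfl, rfl⟩]

theorem pv_combine (bst l : Option Int) :
    (match l with
      | none => bst
      | some w =>
        match bst with
        | none => some w
        | some v => if w > v then some w else bst) = pvOmax bst l := by
  cases l with
  | none => rw [pv_omax_none_right]
  | some w =>
    cases bst with
    | none => rfl
    | some v =>
      show (if w > v then some w else some v) = some (max v w)
      by_cases h : w > v
      · rw [if_pos h, max_eq_right h.le]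
      · rw [if_neg h, max_eq_left (by omega)]

theorem pv_clamp2 (bst : Option Int) (val : Int) :
    (match bst with
      | none => (none : Option Int)
      | some v => if v + val ≥ 0 then some (v + val) else none)
    = match bst with
      | none => none
      | some s => if s + val < 0 then none else some (s + val) := by
  cases bst with
  | none => rfl
  | some v =>
    show (if v + val ≥ 0 then some (v + val) else none) = _
    by_cases h : v + val < 0
    · rw [if_neg (by omega)]
      rw [show (match some v with
          | none => (none : Option Int)
          | some s => if s + val < 0 then none else some (s + val))
        = if v + val < 0 then none else some (v + val) from rfl, if_pos h]
    · rw [if_pos (by omega)]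
      rw [show (match some v with
          | none => (none : Option Int)
          | some s => if s + val < 0 then none else some (s + val))
        = if v + val < 0 then none else some (v + val) from rfl, if_neg h]

theorem pv_lcell_spec (grid : List (List Int)) (m n : Nat)
    (prev : Option (List (List (Option Int)))) (pf : Nat → Nat → Option Int)
    (hsrc : ∀ i' j', i' < m → j' < n →
      (match prev with | none => (none : Option Int) | some P => pvGet2 P i' j' none) = pf i' j')
    (t : List (List (Option Int))) (i j : Nat) (hi : i < m) (hj : j < n) (hz : ¬(i = 0 ∧ j = 0))
    (hpred : ∀ i' j', i' < m → j' < n → ((i' = 0 ∧ j' = 0) ∨ i' < i ∨ (i' = i ∧ j' < j)) →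
      pvGet2 t i' j' none = pvTb grid pf i' j') :
    pvLCell grid prev t i j = pvTb grid pf i j := by
  have hup : 0 < i → pvGet2 t (i - 1) j none = pvTb grid pf (i - 1) j := fun h =>
    hpred _ _ (by omega) hj (Or.inr (Or.inl (by omega)))
  have hlf : 0 < j → pvGet2 t i (j - 1) none = pvTb grid pf i (j - 1) := fun h =>
    hpred _ _ hi (by omega) (Or.inr (Or.inr ⟨rfl, by omega⟩))
  rw [pvTb, if_neg hz]
  by_cases hv : (grid.getD i []).getD j 0 = 0
  · simp only [pvLCell, if_pos hv]
    rw [show (if 0 < i then pvGet2 t (i - 1) j none else none)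
        = (if h : i = 0 then (none : Option Int) else pvTb grid pf (i - 1) j) from by
      by_cases h : i = 0
      · rw [if_neg (by omega), dif_pos h]
      · rw [if_pos (by omega), dif_neg h, hup (by omega)]]
    rw [show (if 0 < j then pvGet2 t i (j - 1) none else none)
        = (if h : j = 0 then (none : Option Int) else pvTb grid pf i (j - 1)) from by
      by_cases h : j = 0
      · rw [if_neg (by omega), dif_pos h]
      · rw [if_pos (by omega), dif_neg h, hlf (by omega)]]
    rw [pv_combine]
    exact pv_clamp2 _ _
  · cases hp : prev with
    | none =>
      simp only [pvLCell, if_neg hv]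
      have hpf : ∀ i' j', i' < m → j' < n → pf i' j' = none := by
        intro i' j' h1 h2
        have := hsrc i' j' h1 h2
        rw [hp] at this
        exact this.symm
      rw [show (if i = 0 then (none : Option Int) else pf (i - 1) j) = none from by
        by_cases h : i = 0
        · rw [if_pos h]
        · rw [if_neg h]
          exact hpf (i - 1) j (by omega) hj]
      rw [show (if j = 0 then (none : Option Int) else pf i (j - 1)) = none from by
        by_cases h : j = 0
        · rw [if_pos h]
        · rw [if_neg h]
          exact hpf i (j - 1) hi (by omega)]
      rfl
    | some P =>
      simp only [pvLCell, if_neg hv]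
      have hpf : ∀ i' j', i' < m → j' < n → pvGet2 P i' j' none = pf i' j' := by
        intro i' j' h1 h2
        have := hsrc i' j' h1 h2
        rw [hp] at this
        exact this
      rw [show (if 0 < i then pvGet2 P (i - 1) j none else none)
          = (if i = 0 then (none : Option Int) else pf (i - 1) j) from by
        by_cases h : i = 0
        · rw [if_neg (by omega), if_pos h]
        · rw [if_pos (by omega), if_neg h, hpf (i - 1) j (by omega) hj]]
      rw [show (if 0 < j then pvGet2 P i (j - 1) none else none)
          = (if j = 0 then (none : Option Int) else pf i (j - 1)) from by
        by_cases h : j = 0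
        · rw [if_neg (by omega), if_pos h]
        · rw [if_pos (by omega), if_neg h, hpf i (j - 1) hi (by omega)]]
      rw [pv_combine]
      exact pv_clamp2 _ _

theorem pv_mklayer_spec (grid : List (List Int)) (m n : Nat) (hm : 0 < m) (hn : 0 < n)
    (prev : Option (List (List (Option Int)))) (pf : Nat → Nat → Option Int)
    (hsrc : ∀ i' j', i' < m → j' < n →
      (match prev with | none => (none : Option Int) | some P => pvGet2 P i' j' none) = pf i' j') :
    ∀ i j, i < m → j < n → pvGet2 (pvMkLayer grid m n prev) i j none = pvTb grid pf i j := by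
  apply pv_fold_spec none m n (fun L i j => pvLCell grid prev L i j) (fun i j => pvTb grid pf i j)
  · refine ⟨by rw [pvSet2, List.length_set, List.length_replicate], ?_⟩
    intro i hi
    rw [pv_row_len_set2, pv_getD_replicate, if_pos hi, List.length_replicate]
  · rw [pv_get2_set2_self _ _ _ _ _ (by simpa using hm)
      (by rw [pv_getD_replicate, if_pos hm, List.length_replicate]; exact hn)]
    exact (pv_tb_start grid pf).symm
  · intro t i j _hdims hi hj hz hpred
    exact pv_lcell_spec grid m n prev pf hsrc t i j hi hj hz hpred

theorem pv_layers (grid : List (List Int)) (m n : Nat) (hm : 0 < m) (hn : 0 < n) :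
    ∀ t : Nat, ∃ L, (List.range (t + 1)).foldl
        (fun st (_b : Nat) => some (pvMkLayer grid m n st)) none = some L
      ∧ ∀ i j, i < m → j < n → pvGet2 L i j none = pvTL grid t i j := by
  intro t
  induction t with
  | zero =>
    refine ⟨pvMkLayer grid m n none, rfl, ?_⟩
    intro i j hi hj
    rw [pv_mklayer_spec grid m n hm hn none (fun _ _ => none) (fun i' j' _ _ => rfl) i j hi hj]
    rfl
  | succ t ih =>
    obtain ⟨L, hL, hcells⟩ := ih
    refine ⟨pvMkLayer grid m n (some L), ?_, ?_⟩
    · rw [List.range_succ, List.foldl_append, hL]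
      rfl
    · intro i j hi hj
      rw [pv_mklayer_spec grid m n hm hn (some L) (pvTL grid t)
        (fun i' j' h1 h2 => hcells i' j' h1 h2) i j hi hj]
      rfl

theorem maxPathScore_spec : Claim_equal_maxPathScore := by
  intro grid k _hDom hPre
  obtain ⟨hne, hrow, _hlen⟩ := hPre
  unfold Spec_maxPathScore maxPathScore maxPathScore_alt
  set m := grid.length with hm'
  set n := grid.headI.length with hn'
  have hm : 0 < m := List.length_pos_of_ne_nil hne
  have hn : 0 < n := List.length_pos_of_ne_nil hrow
  have hmI : (1 : Int) ≤ (m : Int) := by exact_mod_cast hm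
  have hnI : (1 : Int) ≤ (n : Int) := by exact_mod_cast hn
  set K := (min k ((m : Int) + (n : Int))).toNat with hKdef
  have hK : (K : Int) = max (min k ((m : Int) + (n : Int))) 0 := by rw [hKdef]; omega
  have htab := pv_fold grid k m n K hK (List.range m) _ _
    (fun i hi => List.mem_range.mp hi) (pv_init m n K hm hn)
  obtain ⟨hitems, hlenD, hbnd⟩ := htab.2.2.2 (m - 1) (n - 1) (by omega) (by omega)
  have hdense : ∀ i j, i < m → j < n →
      pvGet2 ((List.range m).foldl (fun dp i => (List.range n).foldl
        (fun dp j => if i = 0 ∧ j = 0 then dp else pvSet2 dp i j (pvBCell grid k K dp i j)) dp)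
        (pvSet2 (List.replicate m (List.replicate n (List.replicate (K + 1) (none : Option Int))))
          0 0 ((List.replicate (K + 1) (none : Option Int)).set 0 (some 0)))) i j []
      = pvDSpec grid k K i j := by
    apply pv_fold_spec
    · exact ⟨by rw [pvSet2, List.length_set, List.length_replicate], fun i hi => by
        rw [pv_row_len_set2, pv_getD_replicate, if_pos hi, List.length_replicate]⟩
    · rw [pv_get2_set2_self _ _ _ _ _ (by simpa using hm)
        (by rw [pv_getD_replicate, if_pos hm, List.length_replicate]; exact hn)]
      rw [pvDSpec, if_pos ⟨rfl, rfl⟩]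
    · intro t i j _hd hi hj hz hpred
      exact pv_dspec_step grid k K m n t i j hi hj hz hpred
  have hDlast := hdense (m - 1) (n - 1) (by omega) (by omega)
  rw [hDlast] at hlenD hbnd
  rw [pv_final _ _ hitems, hDlast]
  by_cases hneg : k < 0
  · rw [if_pos (show min k ((m : Int) + (n : Int) - 2) < 0 by omega)]
    by_cases h11 : m = 1 ∧ n = 1
    · rw [if_pos h11]
      obtain ⟨hm1, hn1⟩ := h11
      have e1 : m - 1 = 0 := by omega
      have e2 : n - 1 = 0 := by omega
      have hstart : pvDSpec grid k K (m - 1) (n - 1)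
          = (List.replicate (K + 1) (none : Option Int)).set 0 (some 0) := by
        rw [e1, e2, pvDSpec, if_pos ⟨rfl, rfl⟩]
      rw [hstart, pv_bbest_eq_foldl, ← pv_atM_full _ K (by
        rw [List.length_set, List.length_replicate]), pv_atM_start]
    · rw [if_neg h11]
      have hzlast : ¬(m - 1 = 0 ∧ n - 1 = 0) := by omega
      rw [pv_dspec_neg grid k K hneg _ _ hzlast, pv_bbest_eq_foldl,
        ← pv_atM_full _ K (by rw [List.length_replicate]), pv_atM_replicate]
  · rw [not_lt] at hneg
    rw [if_neg (show ¬ min k ((m : Int) + (n : Int) - 2) < 0 by omega)]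
    set Bn := (min k ((m : Int) + (n : Int) - 2)).toNat with hBn
    have hBnK : Bn ≤ K := by rw [hBn, hKdef]; omega
    obtain ⟨L, hL, hcells⟩ := pv_layers grid m n hm hn Bn
    rw [hL]
    show _ = (match pvGet2 L (m - 1) (n - 1) none with | none => (-1 : Int) | some r => r)
    rw [hcells (m - 1) (n - 1) (by omega) (by omega)]
    rw [pv_bbest_eq_foldl, ← pv_atM_full _ K (by rw [hlenD])]
    have hstab : pvAtM (pvDSpec grid k K (m - 1) (n - 1)) K
        = pvAtM (pvDSpec grid k K (m - 1) (n - 1)) Bn := by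
      by_cases hsm : k ≤ (m : Int) + (n : Int) - 2
      · have hKB : K = Bn := by rw [hKdef, hBn]; omega
        rw [hKB]
      · apply pv_atM_stable
        · intro c hc
          cases hgd : (pvDSpec grid k K (m - 1) (n - 1)).getD c none with
          | none => rfl
          | some s =>
            exfalso
            have hcb := hbnd c (by rw [hgd]; rfl)
            have hBn' : (Bn : Int) = (m : Int) + (n : Int) - 2 := by rw [hBn]; omega
            have hcI : (c : Int) ≤ (m - 1 : Nat) + ((n - 1 : Nat) : Nat) := by exact_mod_cast hcb
            have : ((m - 1 : Nat) : Int) = (m : Int) - 1 := by omega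
            omega
        · exact hBnK
    rw [hstab, pv_dspec_atM grid k K (by omega) (m - 1 + (n - 1)) (m - 1) (n - 1) Bn
      (by omega) hBnK]
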